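-- pv_equiv track=rewrite | github.com/grapheneaffiliate/h4-polytopic-attention | solve_arc2_train_ab.py | solve_3aa6fb7a
-- ===== SOURCE A (Python) =====
-- def solve_3aa6fb7a(g):
--     H,W=len(g),len(g[0]); o=[r[:] for r in g]; vis=[[False]*W for _ in range(H)]
--     for r in range(H):
--         for c in range(W):
--             if g[r][c]==8 and not vis[r][c]:
--                 grp=[]; s=[(r,c)]
--                 while s:
--                     rr,cc=s.pop()
--                     if 0<=rr<H and 0<=cc<W and not vis[rr][cc] and g[rr][cc]==8:
--                         vis[rr][cc]=True; grp.append((rr,cc))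
--                         for d in [(-1,0),(1,0),(0,-1),(0,1)]: s.append((rr+d[0],cc+d[1]))
--                 gs=set(grp); r1,c1=min(r for r,c in grp),min(c for r,c in grp)
--                 r2,c2=max(r for r,c in grp),max(c for r,c in grp)
--                 for cr,cc in [(r1,c1),(r1,c2),(r2,c1),(r2,c2)]:
--                     if (cr,cc) not in gs and 0<=cr<H and 0<=cc<W and g[cr][cc]==0: o[cr][cc]=1
--     return o
-- ===== SOURCE B (Python) =====
-- def solve_3aa6fb7a(g):
--     H, W = len(g), len(g[0])
--     # flat row-major list of all 8-cells
--     cells = [(r, c) for r in range(H) for c in range(W) if g[r][c] == 8]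
--     marks = set()
--     rest = cells
--     while rest:
--         # extract the 4-connected component of the first unassigned 8-cell
--         comp = [rest[0]]
--         rest = rest[1:]
--         while True:
--             near = [p for p in rest
--                     if any(abs(p[0] - q[0]) + abs(p[1] - q[1]) == 1 for q in comp)]
--             if not near:
--                 break
--             comp += near
--             rest = [p for p in rest if p not in near]
--         r1 = min(p[0] for p in comp); r2 = max(p[0] for p in comp)
--         c1 = min(p[1] for p in comp); c2 = max(p[1] for p in comp)
--         for p in ((r1, c1), (r1, c2), (r2, c1), (r2, c2)):
--             if p not in comp:
--                 marks.add(p)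
--     return [[1 if v == 0 and (r, c) in marks else v for c, v in enumerate(row)]
--             for r, row in enumerate(g)]
-- ===== Notes on version B (the rewrite author's own statement) =====
-- stated objective: alternative
-- what changed: A's per-cell scan with a visited matrix, an explicit DFS stack and in-place corner writes into a copied grid is replaced by building the flat row-major list of 8-cells once, partitioning that list into 4-connected components by repeatedly extracting the adjacency closure of the first unassigned cell, collecting bounding-box corner marks in a set, and rebuilding the output grid functionally from the marks.
-- outside the precondition, e.g. on solve_3aa6fb7a([]): A raises IndexError, B raises IndexError; on solve_3aa6fb7a([[8, 0], [0]]): A raises IndexError, B raises IndexError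
import Mathlib
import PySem

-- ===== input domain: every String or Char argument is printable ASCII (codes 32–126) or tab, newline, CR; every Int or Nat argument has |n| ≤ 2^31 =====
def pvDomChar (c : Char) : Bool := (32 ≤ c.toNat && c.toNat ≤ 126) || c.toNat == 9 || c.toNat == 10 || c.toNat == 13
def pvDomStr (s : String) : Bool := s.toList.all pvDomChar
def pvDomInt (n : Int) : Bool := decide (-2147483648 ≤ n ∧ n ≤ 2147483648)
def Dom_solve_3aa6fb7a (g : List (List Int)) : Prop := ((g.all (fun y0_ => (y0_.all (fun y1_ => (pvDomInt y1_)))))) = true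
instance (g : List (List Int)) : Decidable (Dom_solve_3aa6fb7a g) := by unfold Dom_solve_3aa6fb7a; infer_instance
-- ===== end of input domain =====

-- B replaces A's DFS flood fill over the grid (visited matrix, stack, in-place writes) by
-- partitioning the flat list of 8-cells into components by repeated closure extraction and
-- rebuilding the grid from a set of corner marks (objective: alternative; not faster).

-- ===== PORT A =====
-- g[r][c] for indices the guards have already checked to be in range (exact there)
def gcell (g : List (List Int)) (r c : Int) : Int := (g.getD r.toNat []).getD c.toNat 0

def visGet (vis : List (List Bool)) (r c : Int) : Bool := (vis.getD r.toNat []).getD c.toNat false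

def visSet (vis : List (List Bool)) (r c : Int) : List (List Bool) :=
  vis.set r.toNat ((vis.getD r.toNat []).set c.toNat true)

def oSet (o : List (List Int)) (r c : Int) : List (List Int) :=
  o.set r.toNat ((o.getD r.toNat []).set c.toNat 1)

-- the 'while s:' loop; fuel only makes it total (4*H*W+2 is enough, proved below)
def dfsA (g : List (List Int)) (H W : Int) :
    Nat → List (List Bool) → List (Int × Int) → List (Int × Int) →
    List (List Bool) × List (Int × Int)
  | 0, vis, grp, _ => (vis, grp)
  | _ + 1, vis, grp, [] => (vis, grp)
  | fuel + 1, vis, grp, (rr, cc) :: s =>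
      if 0 ≤ rr ∧ rr < H ∧ 0 ≤ cc ∧ cc < W ∧ visGet vis rr cc = false ∧ gcell g rr cc = 8 then
        dfsA g H W fuel (visSet vis rr cc) (grp ++ [(rr, cc)])
          ((rr, cc + 1) :: (rr, cc - 1) :: (rr + 1, cc) :: (rr - 1, cc) :: s)
      else dfsA g H W fuel vis grp s

-- body of the scan over (r, c)
def stepA (g : List (List Int)) (H W : Int)
    (st : List (List Int) × List (List Bool)) (r c : Int) :
    List (List Int) × List (List Bool) :=
  if gcell g r c = 8 ∧ visGet st.2 r c = false then
    let res := dfsA g H W (4 * H.toNat * W.toNat + 2) st.2 [] [(r, c)]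
    let grp := res.2
    let gs := PySem.Set.ofList grp
    let r1 := (PySem.List.min? (grp.map Prod.fst) (fun x => x)).getD 0
    let c1 := (PySem.List.min? (grp.map Prod.snd) (fun x => x)).getD 0
    let r2 := (PySem.List.max? (grp.map Prod.fst) (fun x => x)).getD 0
    let c2 := (PySem.List.max? (grp.map Prod.snd) (fun x => x)).getD 0
    let o' := [(r1, c1), (r1, c2), (r2, c1), (r2, c2)].foldl (fun o p =>
        if ¬ PySem.Set.contains gs p ∧ 0 ≤ p.1 ∧ p.1 < H ∧ 0 ≤ p.2 ∧ p.2 < W ∧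
            gcell g p.1 p.2 = 0 then oSet o p.1 p.2 else o) st.1
    (o', res.1)
  else st

def solve_3aa6fb7a (g : List (List Int)) : List (List Int) :=
  let H : Int := g.length
  let W : Int := (g.headD []).length
  let o := g.map (fun r => r)
  let vis := List.replicate g.length (List.replicate (g.headD []).length false)
  ((List.range g.length).foldl (fun st r =>
      (List.range (g.headD []).length).foldl (fun st c =>
        stepA g H W st (Int.ofNat r) (Int.ofNat c)) st) (o, vis)).1

-- ===== PORT B =====
-- abs(p0-q0)+abs(p1-q1) == 1
def adjB (p q : Int × Int) : Bool := (p.1 - q.1).natAbs + (p.2 - q.2).natAbs == 1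

-- [p for p in rest if any(... for q in comp)]
def nearOf (comp rest : List (Int × Int)) : List (Int × Int) :=
  rest.filter (fun p => comp.any (fun q => adjB p q))

-- the inner 'while True' closure loop; fuel rest.length+1 suffices (rest shrinks each round)
def closeComp : Nat → List (Int × Int) → List (Int × Int) →
    List (Int × Int) × List (Int × Int)
  | 0, comp, rest => (comp, rest)
  | fuel + 1, comp, rest =>
      let near := nearOf comp rest
      if near = [] then (comp, rest)
      else closeComp fuel (comp ++ near) (rest.filter (fun p => ! near.contains p))

-- g[r][c] for the in-range indices of the comprehension
def cellB (g : List (List Int)) (r c : Nat) : Int := (g.getD r []).getD c 0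

-- [(r1,c1),(r1,c2),(r2,c1),(r2,c2)] from the row/col extrema of comp
def cornerList (comp : List (Int × Int)) : List (Int × Int) :=
  [((PySem.List.min? (comp.map Prod.fst) (fun x => x)).getD 0,
    (PySem.List.min? (comp.map Prod.snd) (fun x => x)).getD 0),
   ((PySem.List.min? (comp.map Prod.fst) (fun x => x)).getD 0,
    (PySem.List.max? (comp.map Prod.snd) (fun x => x)).getD 0),
   ((PySem.List.max? (comp.map Prod.fst) (fun x => x)).getD 0,
    (PySem.List.min? (comp.map Prod.snd) (fun x => x)).getD 0),
   ((PySem.List.max? (comp.map Prod.fst) (fun x => x)).getD 0,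
    (PySem.List.max? (comp.map Prod.snd) (fun x => x)).getD 0)]

-- the outer 'while rest:' partition loop; fuel rest.length suffices (head is consumed)
def partLoop : Nat → List (Int × Int) → PySem.Set (Int × Int) → PySem.Set (Int × Int)
  | 0, _, marks => marks
  | _ + 1, [], marks => marks
  | fuel + 1, h :: t, marks =>
      let comp := (closeComp (t.length + 1) [h] t).1
      let marks' := (cornerList comp).foldl
          (fun m p => if comp.contains p then m else PySem.Set.add m p) marks
      partLoop fuel (closeComp (t.length + 1) [h] t).2 marks'

-- [(r, c) for r in range(H) for c in range(W) if g[r][c] == 8]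
def cellsB (g : List (List Int)) : List (Int × Int) :=
  (List.range g.length).flatMap (fun r =>
    ((List.range (g.headD []).length).filter (fun c => cellB g r c == 8)).map
      (fun c => (Int.ofNat r, Int.ofNat c)))

def solve_3aa6fb7a_alt (g : List (List Int)) : List (List Int) :=
  let marks := partLoop (cellsB g).length (cellsB g) PySem.Set.empty
  (PySem.List.enumerate g 0).map (fun rrow =>
    (PySem.List.enumerate rrow.2 0).map (fun cv =>
      if cv.2 = 0 ∧ PySem.Set.contains marks (rrow.1, cv.1) then 1 else cv.2))

-- ===== PRECONDITION & SPEC =====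
-- Pre_ is exactly where A returns: on g = [] Python raises IndexError at g[0], and when some
-- row is shorter than len(g[0]) the row-major scan raises IndexError at g[r][c].
def Pre_solve_3aa6fb7a (g : List (List Int)) : Prop :=
  g ≠ [] ∧ ∀ row ∈ g, (g.headD []).length ≤ row.length
instance (g : List (List Int)) : Decidable (Pre_solve_3aa6fb7a g) := by
  unfold Pre_solve_3aa6fb7a; infer_instance
def pvWitness_solve_3aa6fb7a : List (List Int) := [[8, 8, 0], [0, 8, 0], [0, 0, 0]]

def Spec_solve_3aa6fb7a (g : List (List Int)) (out : List (List Int)) : Prop := out = solve_3aa6fb7a_alt g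
instance (g : List (List Int)) (out : List (List Int)) : Decidable (Spec_solve_3aa6fb7a g out) := by unfold Spec_solve_3aa6fb7a; infer_instance

-- ===== CLAIM (what is proved, stated in full; the proofs are below) =====
def Claim_equal_solve_3aa6fb7a : Prop := ∀ (g : List (List Int)), Dom_solve_3aa6fb7a g → Pre_solve_3aa6fb7a g → Spec_solve_3aa6fb7a g (solve_3aa6fb7a g)

-- ===== LEMMAS AND PROOFS =====

-- ---- proof-side model: the scan-ordered component walk the A-proof is phrased against ----
def nbrsB (p : Int × Int) : List (Int × Int) :=
  [(p.1 - 1, p.2), (p.1 + 1, p.2), (p.1, p.2 - 1), (p.1, p.2 + 1)]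

def growB (g : List (List Int)) (H W : Int)
    (cur : List (Int × Int)) (cs : PySem.Set (Int × Int)) : List (Int × Int) :=
  cur.flatMap (fun p => (nbrsB p).filter (fun q =>
    decide (0 ≤ q.1 ∧ q.1 < H ∧ 0 ≤ q.2 ∧ q.2 < W ∧ gcell g q.1 q.2 = 8) &&
      ! PySem.Set.contains cs q))

def compLoop (g : List (List Int)) (H W : Int) :
    Nat → List (Int × Int) → PySem.Set (Int × Int) → PySem.Set (Int × Int)
  | 0, _, cs => cs
  | fuel + 1, cur, cs =>
      let grow := growB g H W cur cs
      if grow = [] then cs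
      else
        let st := grow.foldl (fun (st : List (Int × Int) × PySem.Set (Int × Int)) p =>
          if PySem.Set.contains st.2 p then st else (st.1 ++ [p], PySem.Set.add st.2 p))
          (cur, cs)
        compLoop g H W fuel st.1 st.2

def componentB (g : List (List Int)) (H W : Int) (seed : Int × Int) : PySem.Set (Int × Int) :=
  compLoop g H W (H.toNat * W.toNat + 1) [seed] (PySem.Set.ofList [seed])

def stepB (g : List (List Int)) (H W : Int)
    (st : PySem.Set (Int × Int) × PySem.Set (Int × Int)) (r c : Int) :
    PySem.Set (Int × Int) × PySem.Set (Int × Int) :=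
  if gcell g r c = 8 ∧ ¬ PySem.Set.contains st.1 (r, c) then
    let comp := componentB g H W (r, c)
    let seen' := PySem.Set.union st.1 comp
    let r1 := (PySem.List.min? (comp.map Prod.fst) (fun x => x)).getD 0
    let r2 := (PySem.List.max? (comp.map Prod.fst) (fun x => x)).getD 0
    let c1 := (PySem.List.min? (comp.map Prod.snd) (fun x => x)).getD 0
    let c2 := (PySem.List.max? (comp.map Prod.snd) (fun x => x)).getD 0
    let marks' := [(r1, c1), (r1, c2), (r2, c1), (r2, c2)].foldl (fun m p =>
        if ¬ PySem.Set.contains comp p then PySem.Set.add m p else m) st.2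
    (seen', marks')
  else st

def modelScan (g : List (List Int)) : PySem.Set (Int × Int) × PySem.Set (Int × Int) :=
  (List.range g.length).foldl (fun st r =>
      (List.range (g.headD []).length).foldl (fun st c =>
        stepB g (g.length : Int) ((g.headD []).length : Int) st (Int.ofNat r) (Int.ofNat c)) st)
    (PySem.Set.empty, PySem.Set.empty)

def modelRun (g : List (List Int)) : List (List Int) :=
  (PySem.List.enumerate g 0).map (fun rrow =>
    (PySem.List.enumerate rrow.2 0).map (fun cv =>
      if cv.2 = 0 ∧ PySem.Set.contains (modelScan g).2 (rrow.1, cv.1) then 1 else cv.2))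

-- ---- proof-side vocabulary ----
def inbP (H W : Int) (p : Int × Int) : Prop := 0 ≤ p.1 ∧ p.1 < H ∧ 0 ≤ p.2 ∧ p.2 < W
def val8P (g : List (List Int)) (H W : Int) (p : Int × Int) : Prop :=
  inbP H W p ∧ gcell g p.1 p.2 = 8
def adjP (g : List (List Int)) (H W : Int) (p q : Int × Int) : Prop :=
  q ∈ nbrsB p ∧ val8P g H W q
def ShapeV (H W : Int) (vis : List (List Bool)) : Prop :=
  vis.length = H.toNat ∧ ∀ row ∈ vis, row.length = W.toNat
def cF (vis : List (List Bool)) : Nat := (vis.map (fun row => row.count false)).sum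

lemma nbrs_symm (p q : Int × Int) : q ∈ nbrsB p ↔ p ∈ nbrsB q := by
  simp only [nbrsB, List.mem_cons, List.not_mem_nil, or_false, Prod.ext_iff]
  obtain ⟨a, b⟩ := p; obtain ⟨x, y⟩ := q; simp; omega

lemma visGet_eq (vis : List (List Bool)) (r c : Int) :
    visGet vis r c = ((vis[r.toNat]?.getD []))[c.toNat]?.getD false := by
  simp [visGet, List.getD_eq_getElem?_getD]

lemma visSet_eq (vis : List (List Bool)) (r c : Int) :
    visSet vis r c = vis.set r.toNat ((vis[r.toNat]?.getD []).set c.toNat true) := by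
  simp [visSet, List.getD_eq_getElem?_getD]

lemma shape_visSet (H W : Int) (vis : List (List Bool)) (r c : Int)
    (h : ShapeV H W vis) (hp : inbP H W (r, c)) : ShapeV H W (visSet vis r c) := by
  obtain ⟨hL, hR⟩ := h
  obtain ⟨h1, h2, h3, h4⟩ := hp
  have hr : r.toNat < vis.length := by omega
  constructor
  · simpa [visSet] using hL
  · intro row hrow
    rcases List.mem_or_eq_of_mem_set hrow with hmem | heq
    · exact hR row hmem
    · subst heq
      rw [List.length_set, List.getD_eq_getElem vis [] hr]
      exact hR _ (List.getElem_mem hr)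

lemma visGet_visSet_self (H W : Int) (vis : List (List Bool)) (r c : Int)
    (h : ShapeV H W vis) (hp : inbP H W (r, c)) :
    visGet (visSet vis r c) r c = true := by
  obtain ⟨hL, hR⟩ := h
  obtain ⟨h1, h2, h3, h4⟩ := hp
  have hr : r.toNat < vis.length := by omega
  have hrow : vis[r.toNat]?.getD [] = vis[r.toNat] := by
    rw [List.getElem?_eq_getElem hr]; rfl
  have hc : c.toNat < (vis[r.toNat]).length := by
    rw [hR _ (List.getElem_mem hr)]; omega
  rw [visGet_eq, visSet_eq, List.getElem?_set_self hr, Option.getD_some, hrow,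
      List.getElem?_set_self hc, Option.getD_some]

lemma visGet_visSet_other (H W : Int) (vis : List (List Bool)) (r c r' c' : Int)
    (h : ShapeV H W vis) (hp : inbP H W (r, c)) (hp' : inbP H W (r', c'))
    (hne : (r', c') ≠ (r, c)) :
    visGet (visSet vis r c) r' c' = visGet vis r' c' := by
  obtain ⟨hL, hR⟩ := h
  obtain ⟨h1, h2, h3, h4⟩ := hp
  obtain ⟨h1', h2', h3', h4'⟩ := hp'
  simp only at h1 h2 h3 h4 h1' h2' h3' h4'
  have hr : r.toNat < vis.length := by omega
  by_cases hrr : r'.toNat = r.toNat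
  · have hreq : r' = r := by omega
    have hcne : c' ≠ c := by
      intro hcc; exact hne (by rw [hreq, hcc])
    have hcc : c.toNat ≠ c'.toNat := by omega
    rw [visGet_eq, visGet_eq, visSet_eq, hrr, List.getElem?_set_self hr, Option.getD_some,
        List.getElem?_set_ne hcc]
  · rw [visGet_eq, visGet_eq, visSet_eq, List.getElem?_set_ne (fun hh => hrr hh.symm)]

lemma count_false_set (l : List Bool) (c : Nat) (hc : c < l.length) (hv : l[c] = false) :
    (l.set c true).count false + 1 = l.count false := by
  induction l generalizing c with
  | nil => simp at hc
  | cons x t ih =>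
    cases c with
    | zero =>
      simp at hv; subst hv
      simp
    | succ n =>
      have hn : n < t.length := by simpa using hc
      have := ih n hn (by simpa using hv)
      simp only [List.set_cons_succ, List.count_cons]
      omega

lemma sum_count_set (l : List (List Bool)) (i : Nat) (hi : i < l.length) (row : List Bool) :
    ((l.set i row).map (fun r => r.count false)).sum + (l[i].count false) =
      (l.map (fun r => r.count false)).sum + row.count false := by
  induction l generalizing i with
  | nil => simp at hi
  | cons x t ih =>
    cases i with
    | zero => simp; omega
    | succ n =>
      have hn : n < t.length := by simpa using hi
      have := ih n hn
      simp only [List.set_cons_succ, List.map_cons, List.sum_cons, List.getElem_cons_succ]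
      omega

lemma cF_visSet (H W : Int) (vis : List (List Bool)) (r c : Int)
    (h : ShapeV H W vis) (hp : inbP H W (r, c)) (hv : visGet vis r c = false) :
    cF (visSet vis r c) + 1 = cF vis := by
  obtain ⟨hL, hR⟩ := h
  obtain ⟨h1, h2, h3, h4⟩ := hp
  have hr : r.toNat < vis.length := by omega
  have hc : c.toNat < (vis[r.toNat]).length := by
    rw [hR _ (List.getElem_mem hr)]; omega
  have hvv : (vis[r.toNat])[c.toNat] = false := by
    unfold visGet at hv
    rwa [List.getD_eq_getElem vis [] hr, List.getD_eq_getElem _ false hc] at hv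
  have hcnt := count_false_set (vis[r.toNat]) c.toNat hc hvv
  have hsum := sum_count_set vis r.toNat hr ((vis[r.toNat]).set c.toNat true)
  unfold cF visSet
  rw [List.getD_eq_getElem vis [] hr]
  omega

lemma cF_le (H W : Int) (vis : List (List Bool)) (h : ShapeV H W vis) :
    cF vis ≤ H.toNat * W.toNat := by
  obtain ⟨hL, hR⟩ := h
  have hb : ∀ x ∈ vis.map (fun r => r.count false), x ≤ W.toNat := by
    intro x hx
    obtain ⟨row, hrow, rfl⟩ := List.mem_map.1 hx
    calc row.count false ≤ row.length := List.count_le_length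
      _ = W.toNat := hR row hrow
  have := List.sum_le_card_nsmul (vis.map (fun r => r.count false)) W.toNat hb
  simpa [cF, hL, Nat.mul_comm] using this

-- ---- the DFS loop of A computes exactly the reachable new cells ----
lemma mem_pushed (rr cc : Int) (q : Int × Int) :
    q ∈ [(rr, cc + 1), (rr, cc - 1), (rr + 1, cc), (rr - 1, cc)] ↔ q ∈ nbrsB (rr, cc) := by
  simp [nbrsB]; tauto

lemma dfs_spec (g : List (List Int)) (H W : Int) :
    ∀ (fuel : Nat) (vis : List (List Bool)) (grp stack : List (Int × Int)),
    ShapeV H W vis → 4 * cF vis + stack.length ≤ fuel →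
    ∃ Δ : List (Int × Int),
      (dfsA g H W fuel vis grp stack).2 = grp ++ Δ ∧
      ShapeV H W (dfsA g H W fuel vis grp stack).1 ∧
      (∀ p, inbP H W p →
        (visGet (dfsA g H W fuel vis grp stack).1 p.1 p.2 = true ↔
          visGet vis p.1 p.2 = true ∨ p ∈ Δ)) ∧
      (∀ p ∈ Δ, val8P g H W p ∧ visGet vis p.1 p.2 = false ∧
        ∃ q ∈ stack, val8P g H W q ∧ Relation.ReflTransGen (adjP g H W) q p) ∧
      (∀ p ∈ Δ, ∀ q, adjP g H W p q →
        visGet (dfsA g H W fuel vis grp stack).1 q.1 q.2 = true) ∧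
      (∀ q ∈ stack, val8P g H W q →
        visGet (dfsA g H W fuel vis grp stack).1 q.1 q.2 = true) := by
  intro fuel
  induction fuel with
  | zero =>
    intro vis grp stack hS hf
    have hstack : stack = [] := by
      cases stack with
      | nil => rfl
      | cons a t => simp at hf
    subst hstack
    exact ⟨[], by simp [dfsA], by simpa [dfsA] using hS,
      fun p _ => by simp [dfsA], by simp, by simp, by simp⟩
  | succ fuel ih =>
    intro vis grp stack hS hf
    cases stack with
    | nil =>
      exact ⟨[], by simp [dfsA], by simpa [dfsA] using hS,
        fun p _ => by simp [dfsA], by simp, by simp, by simp⟩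
    | cons hd s =>
      obtain ⟨rr, cc⟩ := hd
      by_cases hg : 0 ≤ rr ∧ rr < H ∧ 0 ≤ cc ∧ cc < W ∧ visGet vis rr cc = false ∧ gcell g rr cc = 8
      · -- mark branch
        have hinb : inbP H W (rr, cc) := ⟨hg.1, hg.2.1, hg.2.2.1, hg.2.2.2.1⟩
        have hval : val8P g H W (rr, cc) := ⟨hinb, hg.2.2.2.2.2⟩
        have hfresh : visGet vis rr cc = false := hg.2.2.2.2.1
        have hS1 : ShapeV H W (visSet vis rr cc) := shape_visSet H W vis rr cc hS hinb
        have hcf : cF (visSet vis rr cc) + 1 = cF vis := cF_visSet H W vis rr cc hS hinb hfresh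
        have hf1 : 4 * cF (visSet vis rr cc) +
            ((rr, cc + 1) :: (rr, cc - 1) :: (rr + 1, cc) :: (rr - 1, cc) :: s).length ≤ fuel := by
          simp only [List.length_cons] at hf ⊢; omega
        obtain ⟨D, hP1, hP2, hP3, hP4, hP5, hP6⟩ :=
          ih (visSet vis rr cc) (grp ++ [(rr, cc)])
            ((rr, cc + 1) :: (rr, cc - 1) :: (rr + 1, cc) :: (rr - 1, cc) :: s) hS1 hf1
        have hstep : dfsA g H W (fuel + 1) vis grp ((rr, cc) :: s) =
            dfsA g H W fuel (visSet vis rr cc) (grp ++ [(rr, cc)])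
              ((rr, cc + 1) :: (rr, cc - 1) :: (rr + 1, cc) :: (rr - 1, cc) :: s) := by
          simp only [dfsA, if_pos hg]
        rw [hstep]
        -- how visSet changes visGet on in-bounds cells
        have hv1 : ∀ p : Int × Int, inbP H W p →
            (visGet (visSet vis rr cc) p.1 p.2 = true ↔ p = (rr, cc) ∨ visGet vis p.1 p.2 = true) := by
          intro p hp
          by_cases hpe : p = (rr, cc)
          · subst hpe
            simp [visGet_visSet_self H W vis rr cc hS hinb]
          · rw [show visGet (visSet vis rr cc) p.1 p.2 = visGet (visSet vis rr cc) p.1 p.2 from rfl]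
            have := visGet_visSet_other H W vis rr cc p.1 p.2 hS hinb (by exact hp) (by simpa using hpe)
            rw [this]
            simp [hpe]
        refine ⟨(rr, cc) :: D, ?_, hP2, ?_, ?_, ?_, ?_⟩
        · rw [hP1, List.append_assoc]; rfl
        · intro p hp
          rw [hP3 p hp, hv1 p hp]
          simp only [List.mem_cons]
          tauto
        · intro p hp
          rcases List.mem_cons.1 hp with rfl | hpD
          · exact ⟨hval, hfresh, (rr, cc), List.mem_cons_self .., hval, Relation.ReflTransGen.refl⟩
          · obtain ⟨hval', hfresh', q, hqmem, hqval, hqR⟩ := hP4 p hpD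
            have hpne : p ≠ (rr, cc) := by
              intro he; rw [he] at hfresh'
              rw [visGet_visSet_self H W vis rr cc hS hinb] at hfresh'; exact absurd hfresh' (by simp)
            have hfr : visGet vis p.1 p.2 = false := by
              by_contra hcon
              have htrue : visGet vis p.1 p.2 = true := by
                cases hvv : visGet vis p.1 p.2 with
                | false => exact absurd hvv hcon
                | true => rfl
              have : visGet (visSet vis rr cc) p.1 p.2 = true := (hv1 p hval'.1).2 (Or.inr htrue)
              rw [this] at hfresh'; exact absurd hfresh' (by simp)
            refine ⟨hval', hfr, ?_⟩
            rcases List.mem_cons.1 hqmem with rfl | hq2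
            · exact ⟨(rr, cc), List.mem_cons_self .., hval,
                Relation.ReflTransGen.head ⟨(mem_pushed rr cc _).1 (by simp), hqval⟩ hqR⟩
            · rcases List.mem_cons.1 hq2 with rfl | hq3
              · exact ⟨(rr, cc), List.mem_cons_self .., hval,
                  Relation.ReflTransGen.head ⟨(mem_pushed rr cc _).1 (by simp), hqval⟩ hqR⟩
              · rcases List.mem_cons.1 hq3 with rfl | hq4
                · exact ⟨(rr, cc), List.mem_cons_self .., hval,
                    Relation.ReflTransGen.head ⟨(mem_pushed rr cc _).1 (by simp), hqval⟩ hqR⟩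
                · rcases List.mem_cons.1 hq4 with rfl | hq5
                  · exact ⟨(rr, cc), List.mem_cons_self .., hval,
                      Relation.ReflTransGen.head ⟨(mem_pushed rr cc _).1 (by simp), hqval⟩ hqR⟩
                  · exact ⟨q, List.mem_cons_of_mem _ hq5, hqval, hqR⟩
        · intro p hp q hq
          rcases List.mem_cons.1 hp with rfl | hpD
          · have hqmem : q ∈ (rr, cc + 1) :: (rr, cc - 1) :: (rr + 1, cc) :: (rr - 1, cc) :: s := by
              have := (mem_pushed rr cc q).2 hq.1
              simp only [List.mem_cons] at this ⊢
              tauto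
            exact hP6 q hqmem hq.2
          · exact hP5 p hpD q hq
        · intro q hq hqval
          rcases List.mem_cons.1 hq with rfl | hq2
          · exact (hP3 (rr, cc) hqval.1).2 (Or.inl ((hv1 (rr, cc) hqval.1).2 (Or.inl rfl)))
          · exact hP6 q (List.mem_cons_of_mem _ (List.mem_cons_of_mem _
              (List.mem_cons_of_mem _ (List.mem_cons_of_mem _ hq2)))) hqval
      · -- skip branch
        have hstep : dfsA g H W (fuel + 1) vis grp ((rr, cc) :: s) = dfsA g H W fuel vis grp s := by
          simp only [dfsA, if_neg hg]
        rw [hstep]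
        obtain ⟨D, hP1, hP2, hP3, hP4, hP5, hP6⟩ := ih vis grp s hS
          (by simp only [List.length_cons] at hf ⊢; omega)
        refine ⟨D, hP1, hP2, hP3, ?_, hP5, ?_⟩
        · intro p hp
          obtain ⟨hval', hfresh', q, hqmem, hqval, hqR⟩ := hP4 p hp
          exact ⟨hval', hfresh', q, List.mem_cons_of_mem _ hqmem, hqval, hqR⟩
        · intro q hq hqval
          rcases List.mem_cons.1 hq with rfl | hq2
          · have hvt : visGet vis rr cc = true := by
              by_contra hcon
              exact hg ⟨hqval.1.1, hqval.1.2.1, hqval.1.2.2.1, hqval.1.2.2.2,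
                by cases hvv : visGet vis rr cc with
                   | false => rfl
                   | true => exact absurd hvv hcon, hqval.2⟩
            exact (hP3 (rr, cc) hqval.1).2 (Or.inl hvt)
          · exact hP6 q hq2 hqval

-- ---- from the general invariant to "the DFS from a fresh seed collects its component" ----
lemma dfs_component (g : List (List Int)) (H W : Int) (vis : List (List Bool)) (seed : Int × Int)
    (hS : ShapeV H W vis) (hseed : val8P g H W seed) (hfresh : visGet vis seed.1 seed.2 = false)
    (hclosed : ∀ p, inbP H W p → visGet vis p.1 p.2 = true →
      ∀ q, adjP g H W p q → visGet vis q.1 q.2 = true) :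
    ∃ Δ : List (Int × Int),
      (dfsA g H W (4 * H.toNat * W.toNat + 2) vis [] [seed]).2 = Δ ∧
      ShapeV H W (dfsA g H W (4 * H.toNat * W.toNat + 2) vis [] [seed]).1 ∧
      (∀ p, p ∈ Δ ↔ Relation.ReflTransGen (adjP g H W) seed p) ∧
      (∀ p, inbP H W p →
        (visGet (dfsA g H W (4 * H.toNat * W.toNat + 2) vis [] [seed]).1 p.1 p.2 = true ↔
          visGet vis p.1 p.2 = true ∨ Relation.ReflTransGen (adjP g H W) seed p)) := by
  have hfuel : 4 * cF vis + ([seed] : List (Int × Int)).length ≤ 4 * H.toNat * W.toNat + 2 := by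
    have h1 := cF_le H W vis hS
    have h2 : 4 * H.toNat * W.toNat = 4 * (H.toNat * W.toNat) := Nat.mul_assoc 4 _ _
    have h3 : 4 * cF vis ≤ 4 * (H.toNat * W.toNat) := Nat.mul_le_mul_left 4 h1
    simp only [List.length_cons, List.length_nil]
    omega
  obtain ⟨D, hP1, hP2, hP3, hP4, hP5, hP6⟩ :=
    dfs_spec g H W (4 * H.toNat * W.toNat + 2) vis [] [seed] hS hfuel
  have hseedD : seed ∈ D := by
    have hv := hP6 seed (by simp) hseed
    rcases (hP3 seed hseed.1).1 hv with h | h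
    · rw [hfresh] at h; exact absurd h (by simp)
    · exact h
  have hfwd : ∀ p ∈ D, Relation.ReflTransGen (adjP g H W) seed p := by
    intro p hp
    obtain ⟨_, _, q, hq, _, hqR⟩ := hP4 p hp
    rw [List.mem_singleton] at hq
    subst hq
    exact hqR
  have hbwd : ∀ p, Relation.ReflTransGen (adjP g H W) seed p → p ∈ D := by
    intro p hR
    induction hR with
    | refl => exact hseedD
    | @tail x y hax hxy ihx =>
      have hy := hP5 x ihx y hxy
      rcases (hP3 y hxy.2.1).1 hy with h | h
      · exfalso
        have hvalx : val8P g H W x := (hP4 x ihx).1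
        have hadj' : adjP g H W y x := ⟨(nbrs_symm x y).1 hxy.1, hvalx⟩
        have hvx := hclosed y hxy.2.1 h x hadj'
        have hfx := (hP4 x ihx).2.1
        rw [hvx] at hfx
        exact absurd hfx (by simp)
      · exact h
  refine ⟨D, by simpa using hP1, hP2, fun p => ⟨hfwd p, hbwd p⟩, ?_⟩
  intro p hp
  rw [hP3 p hp]
  constructor
  · rintro (h | h)
    · exact Or.inl h
    · exact Or.inr (hfwd p h)
  · rintro (h | h)
    · exact Or.inl h
    · exact Or.inr (hbwd p h)

-- ---- the model's closure loop computes the same component ----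
lemma nodup_length_le (H W : Int) (l : List (Int × Int)) (hnd : l.Nodup)
    (hin : ∀ p ∈ l, inbP H W p) : l.length ≤ H.toNat * W.toNat := by
  have hmapnd : (l.map (fun p : Int × Int => (p.1.toNat, p.2.toNat))).Nodup := by
    refine hnd.map_on ?_
    intro p hp q hq he
    obtain ⟨a1, a2, a3, a4⟩ := hin p hp
    obtain ⟨b1, b2, b3, b4⟩ := hin q hq
    rw [Prod.ext_iff] at he ⊢
    simp only at he ⊢
    omega
  have hsub : (l.map (fun p : Int × Int => (p.1.toNat, p.2.toNat))).toFinset ⊆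
      Finset.range H.toNat ×ˢ Finset.range W.toNat := by
    intro x hx
    rw [List.mem_toFinset, List.mem_map] at hx
    obtain ⟨p, hp, rfl⟩ := hx
    obtain ⟨a1, a2, a3, a4⟩ := hin p hp
    rw [Finset.mem_product, Finset.mem_range, Finset.mem_range]
    constructor <;> omega
  calc l.length = (l.map (fun p : Int × Int => (p.1.toNat, p.2.toNat))).length := by
        rw [List.length_map]
    _ = (l.map (fun p : Int × Int => (p.1.toNat, p.2.toNat))).toFinset.card := by
        rw [List.toFinset_card_of_nodup hmapnd]
    _ ≤ (Finset.range H.toNat ×ˢ Finset.range W.toNat).card := Finset.card_le_card hsub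
    _ = H.toNat * W.toNat := by rw [Finset.card_product, Finset.card_range, Finset.card_range]

lemma compLoop_succ_empty (g : List (List Int)) (H W : Int) (fuel : Nat)
    (cur : List (Int × Int)) (cs : PySem.Set (Int × Int)) (h : growB g H W cur cs = []) :
    compLoop g H W (fuel + 1) cur cs = cs := by
  simp [compLoop, h]

lemma compLoop_succ_grow (g : List (List Int)) (H W : Int) (fuel : Nat)
    (cur : List (Int × Int)) (cs : PySem.Set (Int × Int)) (h : ¬ growB g H W cur cs = []) :
    compLoop g H W (fuel + 1) cur cs =
      compLoop g H W fuel
        ((growB g H W cur cs).foldl (fun st p =>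
          if PySem.Set.contains st.2 p then st else (st.1 ++ [p], PySem.Set.add st.2 p)) (cur, cs)).1
        ((growB g H W cur cs).foldl (fun st p =>
          if PySem.Set.contains st.2 p then st else (st.1 ++ [p], PySem.Set.add st.2 p)) (cur, cs)).2 := by
  simp [compLoop, h]

lemma mem_growB (g : List (List Int)) (H W : Int) (cur : List (Int × Int))
    (cs : PySem.Set (Int × Int)) (q : Int × Int) :
    q ∈ growB g H W cur cs ↔ ∃ p ∈ cur, q ∈ nbrsB p ∧ val8P g H W q ∧ q ∉ cs := by
  unfold growB
  rw [List.mem_flatMap]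
  constructor
  · rintro ⟨p, hp, hq⟩
    rw [List.mem_filter] at hq
    obtain ⟨hmem, hpred⟩ := hq
    rw [Bool.and_eq_true, Bool.not_eq_true'] at hpred
    obtain ⟨hfit, hcon⟩ := hpred
    rw [decide_eq_true_iff] at hfit
    refine ⟨p, hp, hmem, ⟨⟨hfit.1, hfit.2.1, hfit.2.2.1, hfit.2.2.2.1⟩, hfit.2.2.2.2⟩, ?_⟩
    intro hmem2
    rw [← PySem.Set.contains_iff cs q] at hmem2
    rw [hmem2] at hcon
    exact absurd hcon (by simp)
  · rintro ⟨p, hp, hmem, hval, hnotin⟩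
    refine ⟨p, hp, ?_⟩
    rw [List.mem_filter]
    refine ⟨hmem, ?_⟩
    rw [Bool.and_eq_true, Bool.not_eq_true']
    constructor
    · rw [decide_eq_true_iff]
      exact ⟨hval.1.1, hval.1.2.1, hval.1.2.2.1, hval.1.2.2.2, hval.2⟩
    · rw [← Bool.not_eq_true]
      intro hcon
      exact hnotin ((PySem.Set.contains_iff cs q).1 hcon)

lemma foldAdd (l : List (Int × Int)) :
    ∀ (cur : List (Int × Int)) (cs : PySem.Set (Int × Int)),
    (∀ p, p ∈ cur ↔ p ∈ cs) → cs.Nodup →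
    (∀ p, p ∈ (l.foldl (fun st p =>
        if PySem.Set.contains st.2 p then st else (st.1 ++ [p], PySem.Set.add st.2 p)) (cur, cs)).1 ↔
      p ∈ (l.foldl (fun st p =>
        if PySem.Set.contains st.2 p then st else (st.1 ++ [p], PySem.Set.add st.2 p)) (cur, cs)).2) ∧
    (l.foldl (fun st p =>
        if PySem.Set.contains st.2 p then st else (st.1 ++ [p], PySem.Set.add st.2 p)) (cur, cs)).2.Nodup ∧
    (∀ p, p ∈ (l.foldl (fun st p =>
        if PySem.Set.contains st.2 p then st else (st.1 ++ [p], PySem.Set.add st.2 p)) (cur, cs)).2 ↔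
      p ∈ cs ∨ p ∈ l) ∧
    cs.length ≤ (l.foldl (fun st p =>
        if PySem.Set.contains st.2 p then st else (st.1 ++ [p], PySem.Set.add st.2 p)) (cur, cs)).2.length ∧
    (∀ x ∈ l, x ∉ cs → cs.length < (l.foldl (fun st p =>
        if PySem.Set.contains st.2 p then st else (st.1 ++ [p], PySem.Set.add st.2 p)) (cur, cs)).2.length) := by
  induction l with
  | nil =>
    intro cur cs hsync hnd
    exact ⟨hsync, hnd, by simp, Nat.le_refl _, by simp⟩
  | cons a t ih =>
    intro cur cs hsync hnd
    simp only [List.foldl_cons]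
    by_cases hc : PySem.Set.contains cs a = true
    · rw [if_pos hc]
      have ha : a ∈ cs := (PySem.Set.contains_iff cs a).1 hc
      obtain ⟨q1, q2, q3, q4, q5⟩ := ih cur cs hsync hnd
      refine ⟨q1, q2, ?_, q4, ?_⟩
      · intro p
        rw [q3 p]
        simp only [List.mem_cons]
        constructor
        · rintro (h | h)
          · exact Or.inl h
          · exact Or.inr (Or.inr h)
        · rintro (h | h | h)
          · exact Or.inl h
          · rw [h]; exact Or.inl ha
          · exact Or.inr h
      · intro x hx hxcs
        rcases List.mem_cons.1 hx with rfl | hxt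
        · exact absurd ha hxcs
        · exact q5 x hxt hxcs
    · rw [if_neg hc]
      have ha : a ∉ cs := fun h => hc ((PySem.Set.contains_iff cs a).2 h)
      have hadd : PySem.Set.add cs a = cs ++ [a] := PySem.Set.add_of_not_mem ha
      have hsync' : ∀ p, p ∈ cur ++ [a] ↔ p ∈ PySem.Set.add cs a := by
        intro p
        rw [hadd, List.mem_append, List.mem_append, hsync p]
      have hnd' : (PySem.Set.add cs a).Nodup := PySem.Set.nodup_add cs a hnd
      obtain ⟨q1, q2, q3, q4, q5⟩ := ih (cur ++ [a]) (PySem.Set.add cs a) hsync' hnd'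
      have hlen : (PySem.Set.add cs a).length = cs.length + 1 := by
        rw [hadd, List.length_append, List.length_cons, List.length_nil]
      refine ⟨q1, q2, ?_, by omega, ?_⟩
      · intro p
        rw [q3 p, hadd]
        simp only [List.mem_append, List.mem_cons]
        tauto
      · intro x hx hxcs
        omega

lemma compLoop_spec (g : List (List Int)) (H W : Int) (seed : Int × Int) :
    ∀ (fuel : Nat) (cur : List (Int × Int)) (cs : PySem.Set (Int × Int)),
    (∀ p, p ∈ cur ↔ p ∈ cs) → cs.Nodup → (∀ p ∈ cs, val8P g H W p) → seed ∈ cs →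
    (∀ p ∈ cs, Relation.ReflTransGen (adjP g H W) seed p) →
    H.toNat * W.toNat + 1 ≤ fuel + cs.length →
    (∀ p, p ∈ compLoop g H W fuel cur cs ↔ Relation.ReflTransGen (adjP g H W) seed p) ∧
    (compLoop g H W fuel cur cs).Nodup := by
  intro fuel
  induction fuel with
  | zero =>
    intro cur cs hsync hnd hval hseed hall hfuel
    exfalso
    have := nodup_length_le H W cs hnd (fun p hp => (hval p hp).1)
    omega
  | succ fuel ih =>
    intro cur cs hsync hnd hval hseed hall hfuel
    by_cases hge : growB g H W cur cs = []
    · rw [compLoop_succ_empty g H W fuel cur cs hge]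
      refine ⟨fun p => ⟨hall p, ?_⟩, hnd⟩
      intro hR
      induction hR with
      | refl => exact hseed
      | @tail x y hax hxy ihx =>
        by_contra hy
        have : y ∈ growB g H W cur cs :=
          (mem_growB g H W cur cs y).2 ⟨x, (hsync x).2 ihx, hxy.1, hxy.2, hy⟩
        rw [hge] at this
        exact absurd this (List.not_mem_nil)
    · rw [compLoop_succ_grow g H W fuel cur cs hge]
      obtain ⟨q1, q2, q3, q4, q5⟩ := foldAdd (growB g H W cur cs) cur cs hsync hnd
      set st := (growB g H W cur cs).foldl (fun st p =>
        if PySem.Set.contains st.2 p then st else (st.1 ++ [p], PySem.Set.add st.2 p)) (cur, cs) with hst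
      have hval' : ∀ p ∈ st.2, val8P g H W p := by
        intro p hp
        rcases (q3 p).1 hp with h | h
        · exact hval p h
        · exact ((mem_growB g H W cur cs p).1 h).choose_spec.2.2.1
      have hall' : ∀ p ∈ st.2, Relation.ReflTransGen (adjP g H W) seed p := by
        intro p hp
        rcases (q3 p).1 hp with h | h
        · exact hall p h
        · obtain ⟨x, hx, hnb, hvalp, _⟩ := (mem_growB g H W cur cs p).1 h
          exact Relation.ReflTransGen.tail (hall x ((hsync x).1 hx)) ⟨hnb, hvalp⟩
      have hgrowth : cs.length < st.2.length := by
        obtain ⟨a, ha⟩ := List.exists_mem_of_ne_nil _ hge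
        have hanotin : a ∉ cs := ((mem_growB g H W cur cs a).1 ha).choose_spec.2.2.2
        exact q5 a ha hanotin
      exact ih st.1 st.2 q1 q2 hval' ((q3 seed).2 (Or.inl hseed)) hall' (by omega)

lemma componentB_spec (g : List (List Int)) (H W : Int) (seed : Int × Int)
    (hseed : val8P g H W seed) :
    (∀ p, p ∈ componentB g H W seed ↔ Relation.ReflTransGen (adjP g H W) seed p) ∧
    (componentB g H W seed).Nodup := by
  unfold componentB
  refine compLoop_spec g H W seed (H.toNat * W.toNat + 1) [seed] (PySem.Set.ofList [seed])
    ?_ (PySem.Set.nodup_ofList _) ?_ ?_ ?_ ?_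
  · intro p
    rw [PySem.Set.mem_ofList]
  · intro p hp
    rw [PySem.Set.mem_ofList, List.mem_singleton] at hp
    subst hp
    exact hseed
  · rw [PySem.Set.mem_ofList]; exact List.mem_singleton.2 rfl
  · intro p hp
    rw [PySem.Set.mem_ofList, List.mem_singleton] at hp
    subst hp
    exact Relation.ReflTransGen.refl
  · omega

-- ---- extrema only depend on membership ----
lemma min?_congr (l1 l2 : List Int) (h : ∀ x, x ∈ l1 ↔ x ∈ l2) :
    PySem.List.min? l1 (fun x => x) = PySem.List.min? l2 (fun x => x) := by
  cases h1 : PySem.List.min? l1 (fun x => x) with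
  | none =>
    rw [PySem.List.min?_eq_none_iff _ _] at h1
    subst h1
    symm
    rw [PySem.List.min?_eq_none_iff _ _]
    rcases l2 with _ | ⟨a, t⟩
    · rfl
    · exact absurd ((h a).2 (List.mem_cons_self ..)) (List.not_mem_nil)
  | some m1 =>
    cases h2 : PySem.List.min? l2 (fun x => x) with
    | none =>
      rw [PySem.List.min?_eq_none_iff _ _] at h2
      subst h2
      have := (h m1).1 (PySem.List.min?_mem h1)
      exact absurd this (List.not_mem_nil)
    | some m2 =>
      have hm1 : m1 ∈ l2 := (h m1).1 (PySem.List.min?_mem h1)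
      have hm2 : m2 ∈ l1 := (h m2).2 (PySem.List.min?_mem h2)
      have a1 : m1 ≤ m2 := PySem.List.min?_isMin h1 m2 hm2
      have a2 : m2 ≤ m1 := PySem.List.min?_isMin h2 m1 hm1
      rw [le_antisymm a1 a2]

lemma max?_congr (l1 l2 : List Int) (h : ∀ x, x ∈ l1 ↔ x ∈ l2) :
    PySem.List.max? l1 (fun x => x) = PySem.List.max? l2 (fun x => x) := by
  cases h1 : PySem.List.max? l1 (fun x => x) with
  | none =>
    rw [PySem.List.max?_eq_none_iff _ _] at h1
    subst h1
    symm
    rw [PySem.List.max?_eq_none_iff _ _] at *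
    rcases l2 with _ | ⟨a, t⟩
    · rfl
    · exact absurd ((h a).2 (List.mem_cons_self ..)) (List.not_mem_nil)
  | some m1 =>
    cases h2 : PySem.List.max? l2 (fun x => x) with
    | none =>
      rw [PySem.List.max?_eq_none_iff _ _] at h2
      subst h2
      have := (h m1).1 (PySem.List.max?_mem h1)
      exact absurd this (List.not_mem_nil)
    | some m2 =>
      have hm1 : m1 ∈ l2 := (h m1).1 (PySem.List.max?_mem h1)
      have hm2 : m2 ∈ l1 := (h m2).2 (PySem.List.max?_mem h2)
      have a1 : m2 ≤ m1 := PySem.List.max?_isMax h1 m2 hm2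
      have a2 : m1 ≤ m2 := PySem.List.max?_isMax h2 m1 hm1
      rw [le_antisymm a2 a1]

-- ---- output-side invariant: A's o array vs the model's marks set ----
def OShape (g o : List (List Int)) : Prop :=
  o.length = g.length ∧ ∀ i : Nat, (o.getD i []).length = (g.getD i []).length

def OPoint (g o : List (List Int)) (marks : List (Int × Int)) : Prop :=
  ∀ i j : Nat, i < g.length → j < (g.getD i []).length →
    (o.getD i []).getD j 0 =
      if ((i : Int), (j : Int)) ∈ marks ∧ (g.getD i []).getD j 0 = 0 then 1
      else (g.getD i []).getD j 0

def MarksInb (H W : Int) (marks : List (Int × Int)) : Prop := ∀ p ∈ marks, inbP H W p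

lemma oShape_oSet (g o : List (List Int)) (r c : Int)
    (hsh : OShape g o) : OShape g (oSet o r c) := by
  obtain ⟨hL, hR⟩ := hsh
  constructor
  · simpa [oSet] using hL
  · intro i
    by_cases hi : i = r.toNat
    · subst hi
      by_cases hr : r.toNat < o.length
      · have h1 : (oSet o r c).getD r.toNat [] = (o.getD r.toNat []).set c.toNat 1 := by
          unfold oSet
          rw [List.getD_eq_getElem?_getD, List.getElem?_set_self hr, Option.getD_some]
        rw [h1, List.length_set]
        exact hR r.toNat
      · unfold oSet
        rw [List.set_eq_of_length_le (by omega)]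
        exact hR r.toNat
    · have h1 : (oSet o r c).getD i [] = o.getD i [] := by
        unfold oSet
        rw [List.getD_eq_getElem?_getD, List.getElem?_set_ne (fun hh => hi hh.symm),
            ← List.getD_eq_getElem?_getD]
      rw [h1]
      exact hR i

lemma oGet_oSet_self (o : List (List Int)) (r c : Int)
    (hr : r.toNat < o.length) (hc : c.toNat < (o.getD r.toNat []).length) :
    ((oSet o r c).getD r.toNat []).getD c.toNat 0 = 1 := by
  have h1 : (oSet o r c).getD r.toNat [] = (o.getD r.toNat []).set c.toNat 1 := by
    unfold oSet
    rw [List.getD_eq_getElem?_getD, List.getElem?_set_self hr, Option.getD_some]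
  rw [h1, List.getD_eq_getElem?_getD, List.getElem?_set_self hc, Option.getD_some]

lemma oGet_oSet_other (o : List (List Int)) (r c : Int) (i j : Nat)
    (hne : ¬ (i = r.toNat ∧ j = c.toNat)) :
    ((oSet o r c).getD i []).getD j 0 = (o.getD i []).getD j 0 := by
  by_cases hi : i = r.toNat
  · subst hi
    have hj : j ≠ c.toNat := fun hh => hne ⟨rfl, hh⟩
    by_cases hr : r.toNat < o.length
    · have h1 : (oSet o r c).getD r.toNat [] = (o.getD r.toNat []).set c.toNat 1 := by
        unfold oSet
        rw [List.getD_eq_getElem?_getD, List.getElem?_set_self hr, Option.getD_some]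
      rw [h1, List.getD_eq_getElem?_getD, List.getElem?_set_ne (fun hh => hj hh.symm),
          ← List.getD_eq_getElem?_getD]
    · unfold oSet
      rw [List.set_eq_of_length_le (by omega)]
  · have h1 : (oSet o r c).getD i [] = o.getD i [] := by
      unfold oSet
      rw [List.getD_eq_getElem?_getD, List.getElem?_set_ne (fun hh => hi hh.symm),
          ← List.getD_eq_getElem?_getD]
    rw [h1]

-- ---- the four corner writes of A match the four mark insertions of the model ----
lemma cornerFold (g : List (List Int)) (H W : Int)
    (hH : H = (g.length : Int)) (hrows : ∀ row ∈ g, W.toNat ≤ row.length)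
    (gs comp : PySem.Set (Int × Int)) (hgs : ∀ x, PySem.Set.contains gs x = PySem.Set.contains comp x) :
    ∀ (L : List (Int × Int)) (o : List (List Int)) (marks : PySem.Set (Int × Int)),
    (∀ p ∈ L, inbP H W p) → OShape g o → OPoint g o marks → MarksInb H W marks →
    OShape g (L.foldl (fun o p =>
        if ¬ PySem.Set.contains gs p ∧ 0 ≤ p.1 ∧ p.1 < H ∧ 0 ≤ p.2 ∧ p.2 < W ∧
            gcell g p.1 p.2 = 0 then oSet o p.1 p.2 else o) o) ∧
    OPoint g (L.foldl (fun o p =>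
        if ¬ PySem.Set.contains gs p ∧ 0 ≤ p.1 ∧ p.1 < H ∧ 0 ≤ p.2 ∧ p.2 < W ∧
            gcell g p.1 p.2 = 0 then oSet o p.1 p.2 else o) o)
      (L.foldl (fun m p =>
        if ¬ PySem.Set.contains comp p then PySem.Set.add m p else m) marks) ∧
    MarksInb H W (L.foldl (fun m p =>
        if ¬ PySem.Set.contains comp p then PySem.Set.add m p else m) marks) := by
  intro L
  induction L with
  | nil => intro o marks _ h1 h2 h3; exact ⟨h1, h2, h3⟩
  | cons p t ih =>
    intro o marks hLin h1 h2 h3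
    have hp : inbP H W p := hLin p (List.mem_cons_self ..)
    simp only [List.foldl_cons]
    by_cases hcp : PySem.Set.contains comp p = true
    · have hA : ¬ (¬ PySem.Set.contains gs p ∧ 0 ≤ p.1 ∧ p.1 < H ∧ 0 ≤ p.2 ∧ p.2 < W ∧
          gcell g p.1 p.2 = 0) := by
        rw [hgs p]
        intro hcon
        exact hcon.1 hcp
      rw [if_neg hA, if_neg (not_not_intro hcp)]
      exact ih o marks (fun q hq => hLin q (List.mem_cons_of_mem _ hq)) h1 h2 h3
    · have hmarks' : ∀ x, x ∈ PySem.Set.add marks p ↔ x ∈ marks ∨ x = p := by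
        intro x
        exact PySem.Set.mem_add marks p x
      have h3' : MarksInb H W (PySem.Set.add marks p) := by
        intro x hx
        rcases (hmarks' x).1 hx with h | h
        · exact h3 x h
        · rw [h]; exact hp
      rw [if_pos hcp]
      have hrowlen : p.2.toNat < (g.getD p.1.toNat []).length := by
        obtain ⟨a1, a2, a3, a4⟩ := hp
        have hr : p.1.toNat < g.length := by omega
        rw [List.getD_eq_getElem g [] hr]
        have := hrows _ (List.getElem_mem hr)
        omega
      by_cases h0 : gcell g p.1 p.2 = 0
      · have hA : ¬ PySem.Set.contains gs p ∧ 0 ≤ p.1 ∧ p.1 < H ∧ 0 ≤ p.2 ∧ p.2 < W ∧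
            gcell g p.1 p.2 = 0 := by
          refine ⟨by rw [hgs p]; simpa using hcp, hp.1, hp.2.1, hp.2.2.1, hp.2.2.2, h0⟩
        rw [if_pos hA]
        refine ih (oSet o p.1 p.2) (PySem.Set.add marks p)
          (fun q hq => hLin q (List.mem_cons_of_mem _ hq))
          (oShape_oSet g o p.1 p.2 h1) ?_ h3'
        -- OPoint after the write
        intro i j hi hj
        obtain ⟨a1, a2, a3, a4⟩ := hp
        by_cases hij : i = p.1.toNat ∧ j = p.2.toNat
        · obtain ⟨rfl, rfl⟩ := hij
          have hpe : ((p.1.toNat : Int), (p.2.toNat : Int)) = p := by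
            rw [Prod.ext_iff]; constructor <;> simp <;> omega
          rw [oGet_oSet_self o p.1 p.2 (by rw [h1.1]; omega)
              (by rw [h1.2 p.1.toNat]; exact hrowlen)]
          have hg0 : (g.getD p.1.toNat []).getD p.2.toNat 0 = 0 := by
            unfold gcell at h0; exact h0
          rw [if_pos ⟨hpe ▸ (hmarks' p).2 (Or.inr rfl), hg0⟩]
        · rw [oGet_oSet_other o p.1 p.2 i j hij, h2 i j hi hj]
          have hne2 : ((i : Int), (j : Int)) ≠ p := by
            intro he
            apply hij
            rw [← he]
            constructor <;> simp
          have hmm : (((i : Int), (j : Int)) ∈ PySem.Set.add marks p) ↔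
              (((i : Int), (j : Int)) ∈ marks) := by
            rw [hmarks']
            simp [hne2]
          simp only [hmm]
      · rw [if_neg (by intro hcon; exact h0 hcon.2.2.2.2.2)]
        refine ih o (PySem.Set.add marks p)
          (fun q hq => hLin q (List.mem_cons_of_mem _ hq)) h1 ?_ h3'
        intro i j hi hj
        rw [h2 i j hi hj]
        by_cases hij : ((i : Int), (j : Int)) = p
        · have hg : (g.getD i []).getD j 0 ≠ 0 := by
            unfold gcell at h0
            obtain ⟨a1, a2, a3, a4⟩ := hp
            have : p.1.toNat = i ∧ p.2.toNat = j := by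
              rw [← hij]; constructor <;> simp
            rw [← this.1, ← this.2]
            exact h0
          rw [if_neg (fun hcon => hg hcon.2), if_neg (fun hcon => hg hcon.2)]
        · have hmm : (((i : Int), (j : Int)) ∈ PySem.Set.add marks p) ↔
              (((i : Int), (j : Int)) ∈ marks) := by
            rw [hmarks']
            simp [hij]
          simp only [hmm]

-- ---- the joint invariant of the two scans (A vs model) ----
def RelAB (g : List (List Int)) (H W : Int)
    (stA : List (List Int) × List (List Bool))
    (stB : PySem.Set (Int × Int) × PySem.Set (Int × Int)) : Prop :=
  ShapeV H W stA.2 ∧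
  (∀ p : Int × Int, inbP H W p → (visGet stA.2 p.1 p.2 = true ↔ p ∈ stB.1)) ∧
  (∀ p ∈ stB.1, val8P g H W p) ∧
  (∀ p ∈ stB.1, ∀ q, adjP g H W p q → q ∈ stB.1) ∧
  OShape g stA.1 ∧ OPoint g stA.1 stB.2 ∧ MarksInb H W stB.2

lemma val8_of_RTG (g : List (List Int)) (H W : Int) (seed p : Int × Int)
    (hseed : val8P g H W seed) (h : Relation.ReflTransGen (adjP g H W) seed p) :
    val8P g H W p := by
  induction h with
  | refl => exact hseed
  | tail _ hxy _ => exact hxy.2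

lemma extremum_mem (l : List Int) (hne : l ≠ []) :
    (PySem.List.min? l (fun x => x)).getD 0 ∈ l ∧ (PySem.List.max? l (fun x => x)).getD 0 ∈ l := by
  constructor
  · cases h1 : PySem.List.min? l (fun x => x) with
    | none => exact absurd ((PySem.List.min?_eq_none_iff _ _).1 h1) hne
    | some m => rw [Option.getD_some]; exact PySem.List.min?_mem h1
  · cases h1 : PySem.List.max? l (fun x => x) with
    | none => exact absurd ((PySem.List.max?_eq_none_iff _ _).1 h1) hne
    | some m => rw [Option.getD_some]; exact PySem.List.max?_mem h1

lemma step_lockstep (g : List (List Int)) (H W : Int)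
    (hH : H = (g.length : Int)) (hrows : ∀ row ∈ g, W.toNat ≤ row.length)
    (r c : Int) (hin : inbP H W (r, c))
    (stA : List (List Int) × List (List Bool))
    (stB : PySem.Set (Int × Int) × PySem.Set (Int × Int))
    (hrel : RelAB g H W stA stB) :
    RelAB g H W (stepA g H W stA r c) (stepB g H W stB r c) := by
  obtain ⟨S1, S2, S3, S4, S5, S6, S7⟩ := hrel
  by_cases hcB : gcell g r c = 8 ∧ ¬ PySem.Set.contains stB.1 (r, c) = true
  · -- both sides process a fresh component
    have h8 : gcell g r c = 8 := hcB.1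
    have hfresh : visGet stA.2 r c = false := by
      cases hv : visGet stA.2 r c with
      | false => rfl
      | true =>
        exact absurd ((PySem.Set.contains_iff stB.1 (r, c)).2 ((S2 (r, c) hin).1 hv)) hcB.2
    have hcA : gcell g r c = 8 ∧ visGet stA.2 r c = false := ⟨h8, hfresh⟩
    have hseedval : val8P g H W (r, c) := ⟨hin, h8⟩
    have hclosed : ∀ p, inbP H W p → visGet stA.2 p.1 p.2 = true →
        ∀ q, adjP g H W p q → visGet stA.2 q.1 q.2 = true := by
      intro p hp hv q hq
      exact (S2 q hq.2.1).2 (S4 p ((S2 p hp).1 hv) q hq)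
    obtain ⟨Δ, hD1, hD2, hD3, hD4⟩ := dfs_component g H W stA.2 (r, c) S1 hseedval hfresh hclosed
    obtain ⟨hC1, hC2⟩ := componentB_spec g H W (r, c) hseedval
    have hmem : ∀ p, p ∈ Δ ↔ p ∈ componentB g H W (r, c) :=
      fun p => (hD3 p).trans (hC1 p).symm
    have hval8Δ : ∀ p ∈ Δ, val8P g H W p :=
      fun p hp => val8_of_RTG g H W (r, c) p hseedval ((hD3 p).1 hp)
    have hseedΔ : (r, c) ∈ Δ := (hD3 (r, c)).2 Relation.ReflTransGen.refl
    have hΔne : Δ ≠ [] := List.ne_nil_of_mem hseedΔ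
    have hgs : ∀ x, PySem.Set.contains (PySem.Set.ofList Δ) x =
        PySem.Set.contains (componentB g H W (r, c)) x := by
      intro x
      rw [Bool.eq_iff_iff, PySem.Set.contains_iff, PySem.Set.contains_iff, PySem.Set.mem_ofList]
      exact hmem x
    have hfmem : ∀ x, x ∈ Δ.map Prod.fst ↔ x ∈ (componentB g H W (r, c)).map Prod.fst := by
      intro x
      rw [List.mem_map, List.mem_map]
      exact ⟨fun ⟨p, hp, he⟩ => ⟨p, (hmem p).1 hp, he⟩, fun ⟨p, hp, he⟩ => ⟨p, (hmem p).2 hp, he⟩⟩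
    have hsmem : ∀ x, x ∈ Δ.map Prod.snd ↔ x ∈ (componentB g H W (r, c)).map Prod.snd := by
      intro x
      rw [List.mem_map, List.mem_map]
      exact ⟨fun ⟨p, hp, he⟩ => ⟨p, (hmem p).1 hp, he⟩, fun ⟨p, hp, he⟩ => ⟨p, (hmem p).2 hp, he⟩⟩
    have er1 : (PySem.List.min? (Δ.map Prod.fst) (fun x => x)).getD 0 =
        (PySem.List.min? ((componentB g H W (r, c)).map Prod.fst) (fun x => x)).getD 0 := by
      rw [min?_congr _ _ hfmem]
    have er2 : (PySem.List.max? (Δ.map Prod.fst) (fun x => x)).getD 0 =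
        (PySem.List.max? ((componentB g H W (r, c)).map Prod.fst) (fun x => x)).getD 0 := by
      rw [max?_congr _ _ hfmem]
    have ec1 : (PySem.List.min? (Δ.map Prod.snd) (fun x => x)).getD 0 =
        (PySem.List.min? ((componentB g H W (r, c)).map Prod.snd) (fun x => x)).getD 0 := by
      rw [min?_congr _ _ hsmem]
    have ec2 : (PySem.List.max? (Δ.map Prod.snd) (fun x => x)).getD 0 =
        (PySem.List.max? ((componentB g H W (r, c)).map Prod.snd) (fun x => x)).getD 0 := by
      rw [max?_congr _ _ hsmem]
    -- bounds of the four corner coordinates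
    have hfne : Δ.map Prod.fst ≠ [] := by simpa using hΔne
    have hsne : Δ.map Prod.snd ≠ [] := by simpa using hΔne
    obtain ⟨hminf, hmaxf⟩ := extremum_mem (Δ.map Prod.fst) hfne
    obtain ⟨hmins, hmaxs⟩ := extremum_mem (Δ.map Prod.snd) hsne
    have hbf : ∀ x ∈ Δ.map Prod.fst, 0 ≤ x ∧ x < H := by
      intro x hx
      obtain ⟨p, hp, rfl⟩ := List.mem_map.1 hx
      exact ⟨(hval8Δ p hp).1.1, (hval8Δ p hp).1.2.1⟩
    have hbs : ∀ x ∈ Δ.map Prod.snd, 0 ≤ x ∧ x < W := by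
      intro x hx
      obtain ⟨p, hp, rfl⟩ := List.mem_map.1 hx
      exact ⟨(hval8Δ p hp).1.2.2.1, (hval8Δ p hp).1.2.2.2⟩
    unfold stepA stepB
    rw [if_pos hcA, if_pos hcB]
    dsimp only
    rw [hD1, ← er1, ← er2, ← ec1, ← ec2]
    have hcorn : ∀ p ∈ [((PySem.List.min? (Δ.map Prod.fst) (fun x => x)).getD 0,
          (PySem.List.min? (Δ.map Prod.snd) (fun x => x)).getD 0),
        ((PySem.List.min? (Δ.map Prod.fst) (fun x => x)).getD 0,
          (PySem.List.max? (Δ.map Prod.snd) (fun x => x)).getD 0),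
        ((PySem.List.max? (Δ.map Prod.fst) (fun x => x)).getD 0,
          (PySem.List.min? (Δ.map Prod.snd) (fun x => x)).getD 0),
        ((PySem.List.max? (Δ.map Prod.fst) (fun x => x)).getD 0,
          (PySem.List.max? (Δ.map Prod.snd) (fun x => x)).getD 0)], inbP H W p := by
      intro p hp
      have b1 := hbf _ hminf
      have b2 := hbf _ hmaxf
      have b3 := hbs _ hmins
      have b4 := hbs _ hmaxs
      rcases List.mem_cons.1 hp with rfl | hp2
      · exact ⟨b1.1, b1.2, b3.1, b3.2⟩
      rcases List.mem_cons.1 hp2 with rfl | hp3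
      · exact ⟨b1.1, b1.2, b4.1, b4.2⟩
      rcases List.mem_cons.1 hp3 with rfl | hp4
      · exact ⟨b2.1, b2.2, b3.1, b3.2⟩
      rcases List.mem_cons.1 hp4 with rfl | hp5
      · exact ⟨b2.1, b2.2, b4.1, b4.2⟩
      · exact absurd hp5 (List.not_mem_nil)
    obtain ⟨hO1, hO2, hO3⟩ := cornerFold g H W hH hrows (PySem.Set.ofList Δ)
      (componentB g H W (r, c)) hgs _ stA.1 stB.2 hcorn S5 S6 S7
    refine ⟨hD2, ?_, ?_, ?_, hO1, hO2, hO3⟩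
    · intro p hp
      rw [hD4 p hp, PySem.Set.mem_union]
      rw [S2 p hp, hC1 p]
    · intro p hp
      rcases (PySem.Set.mem_union _ _ _).1 hp with h | h
      · exact S3 p h
      · exact val8_of_RTG g H W (r, c) p hseedval ((hC1 p).1 h)
    · intro p hp q hq
      rcases (PySem.Set.mem_union _ _ _).1 hp with h | h
      · exact (PySem.Set.mem_union _ _ _).2 (Or.inl (S4 p h q hq))
      · exact (PySem.Set.mem_union _ _ _).2 (Or.inr
          ((hC1 q).2 (Relation.ReflTransGen.tail ((hC1 p).1 h) hq)))
  · -- both sides skip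
    have hcA : ¬ (gcell g r c = 8 ∧ visGet stA.2 r c = false) := by
      rintro ⟨h8, hv⟩
      apply hcB
      refine ⟨h8, fun hcon => ?_⟩
      have := (S2 (r, c) hin).2 ((PySem.Set.contains_iff stB.1 (r, c)).1 hcon)
      rw [hv] at this
      exact absurd this (by simp)
    unfold stepA stepB
    rw [if_neg hcA, if_neg hcB]
    exact ⟨S1, S2, S3, S4, S5, S6, S7⟩

lemma scan_rel (g : List (List Int)) (H W : Int)
    (hH : H = (g.length : Int)) (hrows : ∀ row ∈ g, W.toNat ≤ row.length) :
    ∀ (cells : List (Nat × Nat)) (stA : List (List Int) × List (List Bool))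
      (stB : PySem.Set (Int × Int) × PySem.Set (Int × Int)),
    (∀ p ∈ cells, inbP H W (Int.ofNat p.1, Int.ofNat p.2)) → RelAB g H W stA stB →
    RelAB g H W (cells.foldl (fun st p => stepA g H W st (Int.ofNat p.1) (Int.ofNat p.2)) stA)
      (cells.foldl (fun st p => stepB g H W st (Int.ofNat p.1) (Int.ofNat p.2)) stB) := by
  intro cells
  induction cells with
  | nil => intro stA stB _ h; exact h
  | cons p t ih =>
    intro stA stB hc h
    simp only [List.foldl_cons]
    exact ih _ _ (fun q hq => hc q (List.mem_cons_of_mem _ hq))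
      (step_lockstep g H W hH hrows (Int.ofNat p.1) (Int.ofNat p.2)
        (hc p (List.mem_cons_self ..)) stA stB h)

lemma foldl_nested {σ : Type} (f : σ → Nat → Nat → σ) :
    ∀ (l inner : List Nat) (init : σ),
    l.foldl (fun st r => inner.foldl (fun st c => f st r c) st) init =
      (l.flatMap (fun r => inner.map (fun c => (r, c)))).foldl (fun st p => f st p.1 p.2) init := by
  intro l
  induction l with
  | nil => intro inner init; rfl
  | cons r t ih =>
    intro inner init
    simp only [List.foldl_cons, List.flatMap_cons, List.foldl_append, List.foldl_map]
    exact ih inner _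

lemma visGet_replicate (n m : Nat) (r c : Int) :
    visGet (List.replicate n (List.replicate m false)) r c = false := by
  rw [visGet_eq, List.getElem?_replicate]
  by_cases h1 : r.toNat < n
  · rw [if_pos h1, Option.getD_some, List.getElem?_replicate]
    by_cases h2 : c.toNat < m
    · rw [if_pos h2, Option.getD_some]
    · rw [if_neg h2]; rfl
  · rw [if_neg h1]
    simp

lemma init_rel (g : List (List Int)) (H W : Int)
    (hH : H = (g.length : Int)) (hW : W = ((g.headD []).length : Int)) :
    RelAB g H W (g.map (fun r => r),
      List.replicate g.length (List.replicate (g.headD []).length false))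
      (PySem.Set.empty, PySem.Set.empty) := by
  have hmap : g.map (fun r => r) = g := List.map_id' g
  refine ⟨⟨?_, ?_⟩, ?_, ?_, ?_, ?_, ?_, ?_⟩
  · simp [hH]
  · intro row hrow
    rw [List.eq_of_mem_replicate hrow, List.length_replicate, hW]
    simp
  · intro p _
    rw [visGet_replicate]
    constructor
    · intro h
      exact absurd h (by simp)
    · intro h
      exact absurd h (by simp [PySem.Set.empty])
  · intro p hp
    exact absurd hp (List.not_mem_nil)
  · intro p hp
    exact absurd hp (List.not_mem_nil)
  · rw [hmap]
    exact ⟨rfl, fun _ => rfl⟩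
  · intro i j _ _
    rw [hmap, if_neg]
    intro hc
    exact absurd hc.1 (by simp [PySem.Set.empty])
  · intro p hp
    exact absurd hp (List.not_mem_nil)

lemma enumerate_getElem? {α : Type} (xs : List α) (s : Int) (i : Nat) (h : i < xs.length) :
    (PySem.List.enumerate xs s)[i]? = some (s + (i : Int), xs[i]) := by
  induction xs generalizing s i with
  | nil => simp at h
  | cons x t ih =>
    cases i with
    | zero => rw [PySem.List.enumerate_cons]; simp
    | succ n =>
      have hn : n < t.length := by simpa using h
      rw [PySem.List.enumerate_cons]
      simp only [List.getElem?_cons_succ, List.getElem_cons_succ]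
      rw [ih (s + 1) n hn]
      have he : (s + 1 + (n : Int), t[n]) = (s + ((n + 1 : Nat) : Int), t[n]) := by
        rw [Prod.ext_iff]
        refine ⟨?_, rfl⟩
        push_cast
        ring
      rw [he]

lemma enumerate_getElem {α : Type} (xs : List α) (s : Int) (i : Nat) (h : i < xs.length) :
    (PySem.List.enumerate xs s)[i]'(by rw [PySem.List.length_enumerate]; exact h) =
      (s + (i : Int), xs[i]) := by
  have h2 := enumerate_getElem? xs s i h
  rw [List.getElem?_eq_getElem (by rw [PySem.List.length_enumerate]; exact h)] at h2
  exact Option.some.inj h2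

lemma final_eq (g o : List (List Int)) (marks : PySem.Set (Int × Int))
    (hsh : OShape g o) (hpt : OPoint g o marks) :
    o = (PySem.List.enumerate g 0).map (fun rrow =>
      (PySem.List.enumerate rrow.2 0).map (fun cv =>
        if cv.2 = 0 ∧ PySem.Set.contains marks (rrow.1, cv.1) = true then 1 else cv.2)) := by
  apply List.ext_getElem
  · rw [List.length_map, PySem.List.length_enumerate]
    exact hsh.1
  intro i h1 h2
  have hgi : i < g.length := by rwa [hsh.1] at h1
  rw [List.getElem_map, enumerate_getElem g 0 i hgi]
  have hrowlen : o[i].length = g[i].length := by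
    have := hsh.2 i
    rwa [List.getD_eq_getElem o [] h1, List.getD_eq_getElem g [] hgi] at this
  apply List.ext_getElem
  · rw [List.length_map, PySem.List.length_enumerate]
    exact hrowlen
  intro j hj1 hj2
  have hgj : j < g[i].length := by rwa [hrowlen] at hj1
  rw [List.getElem_map, enumerate_getElem (g[i]) 0 j hgj]
  have hpoint := hpt i j hgi (by rwa [List.getD_eq_getElem g [] hgi])
  rw [List.getD_eq_getElem o [] h1, List.getD_eq_getElem g [] hgi,
      List.getD_eq_getElem o[i] 0 hj1, List.getD_eq_getElem g[i] 0 hgj] at hpoint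
  rw [hpoint]
  simp only [zero_add]
  by_cases hm : ((i : Int), (j : Int)) ∈ marks
  · by_cases hz : g[i][j] = 0
    · rw [if_pos ⟨hm, hz⟩, if_pos ⟨hz, (PySem.Set.contains_iff marks _).2 hm⟩]
    · rw [if_neg (fun hcon => hz hcon.2), if_neg (fun hcon => hz hcon.1)]
  · have hcon : ¬ PySem.Set.contains marks ((i : Int), (j : Int)) = true :=
      fun hc => hm ((PySem.Set.contains_iff marks _).1 hc)
    rw [if_neg (fun hc => hm hc.1), if_neg (fun hc => hcon hc.2)]

-- ---- A equals the model run ----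
lemma A_eq_model (g : List (List Int)) (hPre : Pre_solve_3aa6fb7a g) :
    solve_3aa6fb7a g = modelRun g := by
  obtain ⟨hne, hrows0⟩ := hPre
  unfold solve_3aa6fb7a modelRun modelScan
  dsimp only
  rw [foldl_nested (fun st r c => stepA g (g.length : Int) ((g.headD []).length : Int) st (Int.ofNat r) (Int.ofNat c))
        (List.range g.length) (List.range (g.headD []).length),
      foldl_nested (fun st r c => stepB g (g.length : Int) ((g.headD []).length : Int) st (Int.ofNat r) (Int.ofNat c))
        (List.range g.length) (List.range (g.headD []).length)]
  have hrows : ∀ row ∈ g, ((g.headD []).length : Int).toNat ≤ row.length := by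
    intro row hr
    simpa using hrows0 row hr
  have hcells : ∀ p ∈ (List.range g.length).flatMap
      (fun r => (List.range (g.headD []).length).map (fun c => (r, c))),
      inbP (g.length : Int) ((g.headD []).length : Int) (Int.ofNat p.1, Int.ofNat p.2) := by
    intro p hp
    obtain ⟨r, hr, hpm⟩ := List.mem_flatMap.1 hp
    obtain ⟨c, hc, rfl⟩ := List.mem_map.1 hpm
    rw [List.mem_range] at hr hc
    refine ⟨?_, ?_, ?_, ?_⟩ <;> simp only [Int.ofNat_eq_natCast] <;> omega
  have hrel := scan_rel g (g.length : Int) ((g.headD []).length : Int) rfl hrows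
    ((List.range g.length).flatMap (fun r => (List.range (g.headD []).length).map (fun c => (r, c))))
    (g.map (fun r => r), List.replicate g.length (List.replicate (g.headD []).length false))
    (PySem.Set.empty, PySem.Set.empty) hcells
    (init_rel g (g.length : Int) ((g.headD []).length : Int) rfl rfl)
  obtain ⟨_, _, _, _, hO1, hO2, _⟩ := hrel
  exact final_eq g _ _ hO1 hO2

-- ==================================================================
-- ---- the common mark characterisation both marks sets satisfy ----
-- ==================================================================

def MarkChar (g : List (List Int)) (H W : Int) (p : Int × Int) : Prop :=
  ∃ q, val8P g H W q ∧ p ∈ cornerList (componentB g H W q) ∧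
    ¬ Relation.ReflTransGen (adjP g H W) q p

lemma adjP_symm (g : List (List Int)) (H W : Int) (p q : Int × Int)
    (hp : val8P g H W p) (h : adjP g H W p q) : adjP g H W q p :=
  ⟨(nbrs_symm p q).1 h.1, hp⟩

lemma rtg_symm (g : List (List Int)) (H W : Int) (h q : Int × Int)
    (hh : val8P g H W h) (hr : Relation.ReflTransGen (adjP g H W) h q) :
    Relation.ReflTransGen (adjP g H W) q h := by
  induction hr with
  | refl => exact Relation.ReflTransGen.refl
  | @tail x y hax hxy ih =>
    exact Relation.ReflTransGen.head
      (adjP_symm g H W x y (val8_of_RTG g H W h x hh hax) hxy) ih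

lemma class_eq (g : List (List Int)) (H W : Int) (h q : Int × Int)
    (hh : val8P g H W h) (hr : Relation.ReflTransGen (adjP g H W) h q) :
    ∀ x, Relation.ReflTransGen (adjP g H W) q x ↔ Relation.ReflTransGen (adjP g H W) h x :=
  fun _ => ⟨fun h2 => hr.trans h2,
    fun h2 => (rtg_symm g H W h q hh hr).trans h2⟩

lemma cornerList_congr (l1 l2 : List (Int × Int)) (h : ∀ x, x ∈ l1 ↔ x ∈ l2) :
    cornerList l1 = cornerList l2 := by
  have hf : ∀ x, x ∈ l1.map Prod.fst ↔ x ∈ l2.map Prod.fst := by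
    intro x
    rw [List.mem_map, List.mem_map]
    exact ⟨fun ⟨p, hp, he⟩ => ⟨p, (h p).1 hp, he⟩, fun ⟨p, hp, he⟩ => ⟨p, (h p).2 hp, he⟩⟩
  have hs : ∀ x, x ∈ l1.map Prod.snd ↔ x ∈ l2.map Prod.snd := by
    intro x
    rw [List.mem_map, List.mem_map]
    exact ⟨fun ⟨p, hp, he⟩ => ⟨p, (h p).1 hp, he⟩, fun ⟨p, hp, he⟩ => ⟨p, (h p).2 hp, he⟩⟩
  unfold cornerList
  rw [min?_congr _ _ hf, max?_congr _ _ hf, min?_congr _ _ hs, max?_congr _ _ hs]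

-- corners of a fellow class member are corners of the seed
lemma corner_transfer (g : List (List Int)) (H W : Int) (h q : Int × Int)
    (hh : val8P g H W h) (hr : Relation.ReflTransGen (adjP g H W) h q) :
    cornerList (componentB g H W q) = cornerList (componentB g H W h) := by
  have hq : val8P g H W q := val8_of_RTG g H W h q hh hr
  refine cornerList_congr _ _ ?_
  intro x
  rw [(componentB_spec g H W q hq).1 x, (componentB_spec g H W h hh).1 x]
  exact class_eq g H W h q hh hr x

-- ---- membership through the model's corner-mark fold ----
lemma setMarkFold (comp : PySem.Set (Int × Int)) :
    ∀ (L : List (Int × Int)) (marks : PySem.Set (Int × Int)) (p : Int × Int),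
    (p ∈ L.foldl (fun m q => if ¬ PySem.Set.contains comp q then PySem.Set.add m q else m) marks ↔
      p ∈ marks ∨ (p ∈ L ∧ p ∉ comp)) := by
  intro L
  induction L with
  | nil => intro marks p; simp
  | cons a t ih =>
    intro marks p
    simp only [List.foldl_cons]
    by_cases hca : PySem.Set.contains comp a = true
    · rw [if_neg (not_not_intro hca)]
      rw [ih marks p]
      have ha : a ∈ comp := (PySem.Set.contains_iff comp a).1 hca
      simp only [List.mem_cons]
      constructor
      · rintro (h | ⟨h1, h2⟩)
        · exact Or.inl h
        · exact Or.inr ⟨Or.inr h1, h2⟩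
      · rintro (h | ⟨h1 | h1, h2⟩)
        · exact Or.inl h
        · subst h1; exact absurd ha h2
        · exact Or.inr ⟨h1, h2⟩
    · rw [if_pos (fun hcon => hca hcon)]
      rw [ih (PySem.Set.add marks a) p]
      have ha : a ∉ comp := fun h => hca ((PySem.Set.contains_iff comp a).2 h)
      rw [PySem.Set.mem_add marks a p]
      simp only [List.mem_cons]
      constructor
      · rintro ((h | h) | ⟨h1, h2⟩)
        · exact Or.inl h
        · subst h; exact Or.inr ⟨Or.inl rfl, ha⟩
        · exact Or.inr ⟨Or.inr h1, h2⟩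
      · rintro (h | ⟨h1 | h1, h2⟩)
        · exact Or.inl (Or.inl h)
        · subst h1; exact Or.inl (Or.inr rfl)
        · exact Or.inr ⟨h1, h2⟩

-- ---- membership through B's corner-mark fold ----
lemma listMarkFold (comp : List (Int × Int)) :
    ∀ (L : List (Int × Int)) (marks : PySem.Set (Int × Int)) (p : Int × Int),
    (p ∈ L.foldl (fun m q => if comp.contains q then m else PySem.Set.add m q) marks ↔
      p ∈ marks ∨ (p ∈ L ∧ p ∉ comp)) := by
  intro L
  induction L with
  | nil => intro marks p; simp
  | cons a t ih =>
    intro marks p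
    simp only [List.foldl_cons]
    by_cases hca : a ∈ comp
    · rw [if_pos (List.elem_eq_true_of_mem hca)]
      rw [ih marks p]
      simp only [List.mem_cons]
      constructor
      · rintro (h | ⟨h1, h2⟩)
        · exact Or.inl h
        · exact Or.inr ⟨Or.inr h1, h2⟩
      · rintro (h | ⟨h1 | h1, h2⟩)
        · exact Or.inl h
        · subst h1; exact absurd hca h2
        · exact Or.inr ⟨h1, h2⟩
    · rw [if_neg (fun hcon => hca (List.mem_of_elem_eq_true hcon))]
      rw [ih (PySem.Set.add marks a) p]
      rw [PySem.Set.mem_add marks a p]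
      simp only [List.mem_cons]
      constructor
      · rintro ((h | h) | ⟨h1, h2⟩)
        · exact Or.inl h
        · subst h; exact Or.inr ⟨Or.inl rfl, hca⟩
        · exact Or.inr ⟨Or.inr h1, h2⟩
      · rintro (h | ⟨h1 | h1, h2⟩)
        · exact Or.inl (Or.inl h)
        · subst h1; exact Or.inl (Or.inr rfl)
        · exact Or.inr ⟨h1, h2⟩

-- ---- the model's marks set satisfies MarkChar once every 8-cell is seen ----

def MInv (g : List (List Int)) (H W : Int)
    (st : PySem.Set (Int × Int) × PySem.Set (Int × Int)) : Prop :=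
  (∀ p ∈ st.1, val8P g H W p) ∧
  (∀ p ∈ st.1, ∀ q, adjP g H W p q → q ∈ st.1) ∧
  (∀ p, p ∈ st.2 ↔ ∃ q ∈ st.1, p ∈ cornerList (componentB g H W q) ∧
    ¬ Relation.ReflTransGen (adjP g H W) q p)

lemma stepB_minv (g : List (List Int)) (H W : Int) (r c : Int) (hin : inbP H W (r, c))
    (st : PySem.Set (Int × Int) × PySem.Set (Int × Int)) (hInv : MInv g H W st) :
    MInv g H W (stepB g H W st r c) ∧
    (∀ p ∈ st.1, p ∈ (stepB g H W st r c).1) ∧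
    (gcell g r c = 8 → (r, c) ∈ (stepB g H W st r c).1) := by
  obtain ⟨S3, S4, SM⟩ := hInv
  by_cases hcB : gcell g r c = 8 ∧ ¬ PySem.Set.contains st.1 (r, c) = true
  · have hseedval : val8P g H W (r, c) := ⟨hin, hcB.1⟩
    obtain ⟨hC1, hC2⟩ := componentB_spec g H W (r, c) hseedval
    have hstep : stepB g H W st r c =
        (PySem.Set.union st.1 (componentB g H W (r, c)),
         (cornerList (componentB g H W (r, c))).foldl (fun m p =>
            if ¬ PySem.Set.contains (componentB g H W (r, c)) p then PySem.Set.add m p else m)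
          st.2) := by
      unfold stepB
      rw [if_pos hcB]
      rfl
    rw [hstep]
    refine ⟨⟨?_, ?_, ?_⟩, ?_, ?_⟩
    · intro p hp
      rcases (PySem.Set.mem_union _ _ _).1 hp with h | h
      · exact S3 p h
      · exact val8_of_RTG g H W (r, c) p hseedval ((hC1 p).1 h)
    · intro p hp q hq
      rcases (PySem.Set.mem_union _ _ _).1 hp with h | h
      · exact (PySem.Set.mem_union _ _ _).2 (Or.inl (S4 p h q hq))
      · exact (PySem.Set.mem_union _ _ _).2 (Or.inr
          ((hC1 q).2 (Relation.ReflTransGen.tail ((hC1 p).1 h) hq)))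
    · intro p
      rw [setMarkFold (componentB g H W (r, c)) (cornerList (componentB g H W (r, c))) st.2 p,
          SM p]
      constructor
      · rintro (⟨q, hq1, hq2, hq3⟩ | ⟨h1, h2⟩)
        · exact ⟨q, (PySem.Set.mem_union _ _ _).2 (Or.inl hq1), hq2, hq3⟩
        · refine ⟨(r, c), (PySem.Set.mem_union _ _ _).2 (Or.inr ((hC1 (r, c)).2
            Relation.ReflTransGen.refl)), h1, fun hcon => h2 ((hC1 p).2 hcon)⟩
      · rintro ⟨q, hq1, hq2, hq3⟩
        rcases (PySem.Set.mem_union _ _ _).1 hq1 with h | h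
        · exact Or.inl ⟨q, h, hq2, hq3⟩
        · have hrq : Relation.ReflTransGen (adjP g H W) (r, c) q := (hC1 q).1 h
          refine Or.inr ⟨?_, ?_⟩
          · rwa [corner_transfer g H W (r, c) q hseedval hrq] at hq2
          · intro hcon
            exact hq3 ((class_eq g H W (r, c) q hseedval hrq p).2 ((hC1 p).1 hcon))
    · intro p hp
      exact (PySem.Set.mem_union _ _ _).2 (Or.inl hp)
    · intro _
      exact (PySem.Set.mem_union _ _ _).2 (Or.inr ((hC1 (r, c)).2 Relation.ReflTransGen.refl))
  · have hstep : stepB g H W st r c = st := by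
      unfold stepB
      rw [if_neg hcB]
    rw [hstep]
    refine ⟨⟨S3, S4, SM⟩, fun p hp => hp, ?_⟩
    intro h8
    by_contra hcon
    exact hcB ⟨h8, fun hc2 => hcon ((PySem.Set.contains_iff st.1 (r, c)).1 hc2)⟩

lemma scanB_minv (g : List (List Int)) (H W : Int) :
    ∀ (cells : List (Nat × Nat)) (st : PySem.Set (Int × Int) × PySem.Set (Int × Int)),
    (∀ p ∈ cells, inbP H W (Int.ofNat p.1, Int.ofNat p.2)) → MInv g H W st →
    MInv g H W (cells.foldl (fun st p => stepB g H W st (Int.ofNat p.1) (Int.ofNat p.2)) st) ∧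
    (∀ q ∈ st.1, q ∈ (cells.foldl (fun st p => stepB g H W st (Int.ofNat p.1) (Int.ofNat p.2)) st).1) ∧
    (∀ p ∈ cells, gcell g (Int.ofNat p.1) (Int.ofNat p.2) = 8 →
      (Int.ofNat p.1, Int.ofNat p.2) ∈
        (cells.foldl (fun st p => stepB g H W st (Int.ofNat p.1) (Int.ofNat p.2)) st).1) := by
  intro cells
  induction cells with
  | nil => intro st _ h; exact ⟨h, fun q hq => hq, by simp⟩
  | cons a t ih =>
    intro st hc h
    simp only [List.foldl_cons]
    obtain ⟨h1, h2, h3⟩ := stepB_minv g H W (Int.ofNat a.1) (Int.ofNat a.2)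
      (hc a (List.mem_cons_self ..)) st h
    obtain ⟨ih1, ih2, ih3⟩ := ih (stepB g H W st (Int.ofNat a.1) (Int.ofNat a.2))
      (fun q hq => hc q (List.mem_cons_of_mem _ hq)) h1
    refine ⟨ih1, fun q hq => ih2 q (h2 q hq), ?_⟩
    intro p hp h8
    rcases List.mem_cons.1 hp with rfl | hpt
    · exact ih2 _ (h3 h8)
    · exact ih3 p hpt h8

lemma modelScan_marks (g : List (List Int)) :
    ∀ p, p ∈ (modelScan g).2 ↔
      MarkChar g (g.length : Int) ((g.headD []).length : Int) p := by
  intro p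
  unfold modelScan
  rw [foldl_nested (fun st r c => stepB g (g.length : Int) ((g.headD []).length : Int) st
        (Int.ofNat r) (Int.ofNat c))
      (List.range g.length) (List.range (g.headD []).length)]
  have hcells : ∀ q ∈ (List.range g.length).flatMap
      (fun r => (List.range (g.headD []).length).map (fun c => (r, c))),
      inbP (g.length : Int) ((g.headD []).length : Int) (Int.ofNat q.1, Int.ofNat q.2) := by
    intro q hq
    obtain ⟨r, hr, hqm⟩ := List.mem_flatMap.1 hq
    obtain ⟨c, hc, rfl⟩ := List.mem_map.1 hqm
    rw [List.mem_range] at hr hc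
    refine ⟨?_, ?_, ?_, ?_⟩ <;> simp only [Int.ofNat_eq_natCast] <;> omega
  have hInv0 : MInv g (g.length : Int) ((g.headD []).length : Int)
      (PySem.Set.empty, PySem.Set.empty) := by
    refine ⟨?_, ?_, ?_⟩
    · intro q hq; exact absurd hq (List.not_mem_nil)
    · intro q hq; exact absurd hq (List.not_mem_nil)
    · intro x
      constructor
      · intro hx; exact absurd hx (List.not_mem_nil)
      · rintro ⟨q, hq, _⟩; exact absurd hq (List.not_mem_nil)
  obtain ⟨⟨F1, F2, FM⟩, Fmono, Fall⟩ := scanB_minv g (g.length : Int) ((g.headD []).length : Int)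
    ((List.range g.length).flatMap (fun r => (List.range (g.headD []).length).map (fun c => (r, c))))
    (PySem.Set.empty, PySem.Set.empty) hcells hInv0
  rw [FM p]
  constructor
  · rintro ⟨q, hq1, hq2, hq3⟩
    exact ⟨q, F1 q hq1, hq2, hq3⟩
  · rintro ⟨q, hq1, hq2, hq3⟩
    refine ⟨q, ?_, hq2, hq3⟩
    obtain ⟨⟨a1, a2, a3, a4⟩, a8⟩ := hq1
    have hqc : (q.1.toNat, q.2.toNat) ∈ (List.range g.length).flatMap
        (fun r => (List.range (g.headD []).length).map (fun c => (r, c))) := by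
      rw [List.mem_flatMap]
      refine ⟨q.1.toNat, by rw [List.mem_range]; omega, ?_⟩
      rw [List.mem_map]
      exact ⟨q.2.toNat, by rw [List.mem_range]; omega, rfl⟩
    have hqe : (Int.ofNat q.1.toNat, Int.ofNat q.2.toNat) = q := by
      rw [Prod.ext_iff]
      constructor <;> simp only [Int.ofNat_eq_natCast] <;> omega
    have := Fall (q.1.toNat, q.2.toNat) hqc (by
      rw [show (Int.ofNat q.1.toNat : Int) = q.1 by simp only [Int.ofNat_eq_natCast]; omega,
          show (Int.ofNat q.2.toNat : Int) = q.2 by simp only [Int.ofNat_eq_natCast]; omega]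
      exact a8)
    rwa [hqe] at this

-- ---- B's cell list: membership and Nodup ----
lemma cellsB_mem (g : List (List Int)) (p : Int × Int) :
    p ∈ cellsB g ↔ val8P g (g.length : Int) ((g.headD []).length : Int) p := by
  unfold cellsB
  rw [List.mem_flatMap]
  constructor
  · rintro ⟨r, hr, hpm⟩
    rw [List.mem_range] at hr
    obtain ⟨c, hc, rfl⟩ := List.mem_map.1 hpm
    rw [List.mem_filter, List.mem_range] at hc
    obtain ⟨hcw, h8⟩ := hc
    rw [beq_iff_eq] at h8
    have hg : gcell g (Int.ofNat r) (Int.ofNat c) = cellB g r c := by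
      simp [gcell, cellB]
    refine ⟨⟨?_, ?_, ?_, ?_⟩, by rw [hg]; exact h8⟩ <;>
      simp only [Int.ofNat_eq_natCast] <;> omega
  · rintro ⟨⟨a1, a2, a3, a4⟩, a8⟩
    refine ⟨p.1.toNat, by rw [List.mem_range]; omega, ?_⟩
    rw [List.mem_map]
    refine ⟨p.2.toNat, ?_, ?_⟩
    · rw [List.mem_filter, List.mem_range]
      refine ⟨by omega, ?_⟩
      rw [beq_iff_eq]
      have hg : gcell g p.1 p.2 = cellB g p.1.toNat p.2.toNat := by
        simp [gcell, cellB]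
      rw [← hg]
      exact a8
    · rw [Prod.ext_iff]
      constructor <;> simp only [Int.ofNat_eq_natCast] <;> omega

lemma cellsB_nodup (g : List (List Int)) : (cellsB g).Nodup := by
  unfold cellsB
  have hgen : ∀ rs : List Nat, rs.Nodup →
      (rs.flatMap (fun r =>
        ((List.range (g.headD []).length).filter (fun c => cellB g r c == 8)).map
          (fun c => (Int.ofNat r, Int.ofNat c)))).Nodup := by
    intro rs
    induction rs with
    | nil => intro _; simp
    | cons r t ih =>
      intro hnd
      rw [List.flatMap_cons]
      refine List.Nodup.append ?_ (ih (List.nodup_cons.1 hnd).2) ?_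
      · refine List.Nodup.map ?_ ((List.nodup_range).filter _)
        intro a b he
        rw [Prod.ext_iff] at he
        have := he.2
        simp only [Int.ofNat_eq_natCast] at this
        omega
      · intro x hx hx2
        obtain ⟨c, _, rfl⟩ := List.mem_map.1 hx
        obtain ⟨r', hr', hx3⟩ := List.mem_flatMap.1 hx2
        obtain ⟨c', _, he⟩ := List.mem_map.1 hx3
        rw [Prod.ext_iff] at he
        have h1 : Int.ofNat r' = Int.ofNat r := he.1
        have : r' = r := by simp only [Int.ofNat_eq_natCast] at h1; omega
        subst this
        exact (List.nodup_cons.1 hnd).1 hr'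
  exact hgen (List.range g.length) List.nodup_range

-- ---- B's closure extraction computes the class of its seed ----
lemma adjB_iff (p q : Int × Int) : adjB p q = true ↔ q ∈ nbrsB p := by
  unfold adjB nbrsB
  rw [beq_iff_eq]
  obtain ⟨a, b⟩ := p; obtain ⟨x, y⟩ := q
  simp only [List.mem_cons, List.not_mem_nil, or_false, Prod.mk.injEq]
  omega

lemma mem_nearOf (comp rest : List (Int × Int)) (p : Int × Int) :
    p ∈ nearOf comp rest ↔ p ∈ rest ∧ ∃ q ∈ comp, q ∈ nbrsB p := by
  unfold nearOf
  rw [List.mem_filter, List.any_eq_true]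
  constructor
  · rintro ⟨h1, q, hq, hadj⟩
    exact ⟨h1, q, hq, (adjB_iff p q).1 hadj⟩
  · rintro ⟨h1, q, hq, hadj⟩
    exact ⟨h1, ⟨q, hq, (adjB_iff p q).2 hadj⟩⟩

lemma notContains_iff (l : List (Int × Int)) (a : Int × Int) :
    (! l.contains a) = true ↔ a ∉ l := by simp

lemma closeComp_succ (fuel : Nat) (comp rest : List (Int × Int)) :
    closeComp (fuel + 1) comp rest =
      if nearOf comp rest = [] then (comp, rest)
      else closeComp fuel (comp ++ nearOf comp rest)
        (rest.filter (fun p => ! (nearOf comp rest).contains p)) := rfl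

lemma filter_length_lt {α : Type} [DecidableEq α] (l : List α) (P : α → Bool) (a : α)
    (ha : a ∈ l) (hPa : P a = false) : (l.filter P).length < l.length := by
  induction l with
  | nil => exact absurd ha (List.not_mem_nil)
  | cons x t ih =>
    by_cases hx : P x = true
    · rw [List.filter_cons_of_pos hx]
      rcases List.mem_cons.1 ha with rfl | hat
      · rw [hPa] at hx; exact absurd hx (by simp)
      · have := ih hat
        simp only [List.length_cons]
        omega
    · rw [List.filter_cons_of_neg hx]
      have : (t.filter P).length ≤ t.length := List.length_filter_le _ _
      simp only [List.length_cons]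
      omega

lemma closeComp_spec (g : List (List Int)) (H W : Int) (h : Int × Int) :
    ∀ (fuel : Nat) (comp rest : List (Int × Int)),
    rest.length < fuel →
    (∀ p ∈ comp, val8P g H W p) → (∀ p ∈ rest, val8P g H W p) →
    (∀ p, (p ∈ comp ∨ p ∈ rest) → ∀ q, adjP g H W p q → q ∈ comp ∨ q ∈ rest) →
    (∀ p ∈ comp, Relation.ReflTransGen (adjP g H W) h p) → h ∈ comp →
    (∀ p ∈ rest, p ∉ comp) →
    (∀ x, x ∈ (closeComp fuel comp rest).1 ↔ Relation.ReflTransGen (adjP g H W) h x) ∧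
    (∀ x, x ∈ (closeComp fuel comp rest).2 ↔
      x ∈ rest ∧ ¬ Relation.ReflTransGen (adjP g H W) h x) ∧
    (closeComp fuel comp rest).2.Sublist rest := by
  intro fuel
  induction fuel with
  | zero =>
    intro comp rest hlen
    omega
  | succ fuel ih =>
    intro comp rest hlen hv1 hv2 hcl hrt hh hdisj
    by_cases hne : nearOf comp rest = []
    · rw [closeComp_succ, if_pos hne]
      -- comp is adjP-closed: any neighbour of comp in rest would be in nearOf
      have hcomp_cl : ∀ p ∈ comp, ∀ q, adjP g H W p q → q ∈ comp := by
        intro p hp q hq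
        rcases hcl p (Or.inl hp) q hq with h1 | h1
        · exact h1
        · exfalso
          have : q ∈ nearOf comp rest := by
            rw [mem_nearOf]
            exact ⟨h1, p, hp, (nbrs_symm q p).2 hq.1⟩
          rw [hne] at this
          exact absurd this (List.not_mem_nil)
      have hbwd : ∀ x, Relation.ReflTransGen (adjP g H W) h x → x ∈ comp := by
        intro x hx
        induction hx with
        | refl => exact hh
        | @tail a b hab habj ihb => exact hcomp_cl a ihb b habj
      refine ⟨fun x => ⟨hrt x, hbwd x⟩, ?_, List.Sublist.refl rest⟩
      intro x
      constructor
      · intro hx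
        refine ⟨hx, fun hcon => hdisj x hx (hbwd x hcon)⟩
      · rintro ⟨hx, _⟩
        exact hx
    · rw [closeComp_succ, if_neg hne]
      obtain ⟨a, ha⟩ := List.exists_mem_of_ne_nil _ hne
      have hasub : a ∈ rest := ((mem_nearOf comp rest a).1 ha).1
      have hlen' : (rest.filter (fun p => ! (nearOf comp rest).contains p)).length < fuel := by
        have := filter_length_lt rest (fun p => ! (nearOf comp rest).contains p) a hasub
          (by simp [ha])
        omega
      have hnear_rtg : ∀ p ∈ nearOf comp rest, Relation.ReflTransGen (adjP g H W) h p := by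
        intro p hp
        obtain ⟨hpr, q, hq, hqn⟩ := (mem_nearOf comp rest p).1 hp
        exact Relation.ReflTransGen.tail (hrt q hq) ⟨(nbrs_symm q p).2 hqn, hv2 p hpr⟩
      have hmemsets : ∀ x, (x ∈ comp ++ nearOf comp rest ∨
          x ∈ rest.filter (fun p => ! (nearOf comp rest).contains p)) ↔
            (x ∈ comp ∨ x ∈ rest) := by
        intro x
        rw [List.mem_append, List.mem_filter, mem_nearOf]
        constructor
        · rintro ((h1 | ⟨h1, _⟩) | ⟨h1, _⟩)
          · exact Or.inl h1
          · exact Or.inr h1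
          · exact Or.inr h1
        · rintro (h1 | h1)
          · exact Or.inl (Or.inl h1)
          · by_cases h2 : x ∈ nearOf comp rest
            · exact Or.inl (Or.inr ((mem_nearOf comp rest x).1 h2))
            · refine Or.inr ⟨h1, (notContains_iff _ x).2 h2⟩
      obtain ⟨r1, r2, r3⟩ := ih (comp ++ nearOf comp rest)
        (rest.filter (fun p => ! (nearOf comp rest).contains p)) hlen'
        (by intro p hp
            rcases List.mem_append.1 hp with h1 | h1
            · exact hv1 p h1
            · exact hv2 p ((mem_nearOf comp rest p).1 h1).1)
        (by intro p hp
            exact hv2 p (List.mem_filter.1 hp).1)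
        (by intro p hp q hq
            rw [hmemsets q]
            exact hcl p ((hmemsets p).1 hp) q hq)
        (by intro p hp
            rcases List.mem_append.1 hp with h1 | h1
            · exact hrt p h1
            · exact hnear_rtg p h1)
        (List.mem_append.2 (Or.inl hh))
        (by intro p hp
            obtain ⟨hp1, hp2⟩ := List.mem_filter.1 hp
            have hp3 : p ∉ nearOf comp rest := (notContains_iff _ p).1 hp2
            intro hcon
            rcases List.mem_append.1 hcon with h1 | h1
            · exact hdisj p hp1 h1
            · exact hp3 h1)
      refine ⟨r1, ?_, r3.trans List.filter_sublist⟩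
      intro x
      rw [r2 x, List.mem_filter]
      constructor
      · rintro ⟨⟨h1, _⟩, h2⟩
        exact ⟨h1, h2⟩
      · rintro ⟨h1, h2⟩
        refine ⟨⟨h1, (notContains_iff _ x).2 fun hcon => h2 (hnear_rtg x hcon)⟩, h2⟩

-- ---- B's partition loop computes exactly the MarkChar marks ----
lemma partLoop_spec (g : List (List Int)) (H W : Int) :
    ∀ (fuel : Nat) (rest : List (Int × Int)) (marks : PySem.Set (Int × Int)),
    rest.length ≤ fuel → rest.Nodup →
    (∀ p ∈ rest, val8P g H W p) →
    (∀ p ∈ rest, ∀ q, adjP g H W p q → q ∈ rest) →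
    (∀ p, p ∈ marks ↔ ∃ q, val8P g H W q ∧ q ∉ rest ∧
      p ∈ cornerList (componentB g H W q) ∧ ¬ Relation.ReflTransGen (adjP g H W) q p) →
    ∀ p, p ∈ partLoop fuel rest marks ↔ MarkChar g H W p := by
  intro fuel
  induction fuel with
  | zero =>
    intro rest marks hlen hnd hv hcl hm p
    have : rest = [] := List.eq_nil_of_length_eq_zero (by omega)
    subst this
    show p ∈ marks ↔ _
    rw [hm p]
    unfold MarkChar
    constructor
    · rintro ⟨q, h1, _, h3, h4⟩
      exact ⟨q, h1, h3, h4⟩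
    · rintro ⟨q, h1, h3, h4⟩
      exact ⟨q, h1, List.not_mem_nil, h3, h4⟩
  | succ fuel ih =>
    intro rest marks hlen hnd hv hcl hm p
    cases rest with
    | nil =>
      show p ∈ marks ↔ _
      rw [hm p]
      unfold MarkChar
      constructor
      · rintro ⟨q, h1, _, h3, h4⟩
        exact ⟨q, h1, h3, h4⟩
      · rintro ⟨q, h1, h3, h4⟩
        exact ⟨q, h1, List.not_mem_nil, h3, h4⟩
    | cons h t =>
      have hhv : val8P g H W h := hv h (List.mem_cons_self ..)
      have hdisj : ∀ p ∈ t, p ∉ ([h] : List (Int × Int)) := by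
        intro x hx hc
        rw [List.mem_singleton] at hc
        subst hc
        exact (List.nodup_cons.1 hnd).1 hx
      obtain ⟨c1, c2, c3⟩ := closeComp_spec g H W h (t.length + 1) [h] t
        (by omega)
        (by intro x hx; rw [List.mem_singleton] at hx; subst hx; exact hhv)
        (fun x hx => hv x (List.mem_cons_of_mem _ hx))
        (by intro x hx q hq
            have hxr : x ∈ h :: t := by
              rcases hx with h1 | h1
              · rw [List.mem_singleton] at h1; subst h1; exact List.mem_cons_self ..
              · exact List.mem_cons_of_mem _ h1
            have := hcl x hxr q hq
            rcases List.mem_cons.1 this with h1 | h1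
            · subst h1; exact Or.inl (List.mem_singleton.2 rfl)
            · exact Or.inr h1)
        (by intro x hx; rw [List.mem_singleton] at hx; subst hx
            exact Relation.ReflTransGen.refl)
        (List.mem_singleton.2 rfl)
        hdisj
      have hunf : partLoop (fuel + 1) (h :: t) marks =
          partLoop fuel (closeComp (t.length + 1) [h] t).2
            ((cornerList (closeComp (t.length + 1) [h] t).1).foldl
              (fun m p => if (closeComp (t.length + 1) [h] t).1.contains p then m
                else PySem.Set.add m p) marks) := by
        rfl
      rw [hunf]
      have hclcomp : cornerList (closeComp (t.length + 1) [h] t).1 =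
          cornerList (componentB g H W h) := by
        refine cornerList_congr _ _ ?_
        intro x
        rw [c1 x, (componentB_spec g H W h hhv).1 x]
      -- facts about the new rest
      have hrlen : (closeComp (t.length + 1) [h] t).2.length ≤ fuel := by
        have := c3.length_le
        simp only [List.length_cons] at hlen
        omega
      have hrnd : (closeComp (t.length + 1) [h] t).2.Nodup :=
        c3.nodup (List.nodup_cons.1 hnd).2
      have hrv : ∀ x ∈ (closeComp (t.length + 1) [h] t).2, val8P g H W x := by
        intro x hx
        exact hv x (List.mem_cons_of_mem _ ((c2 x).1 hx).1)
      have hrcl : ∀ x ∈ (closeComp (t.length + 1) [h] t).2, ∀ q, adjP g H W x q →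
          q ∈ (closeComp (t.length + 1) [h] t).2 := by
        intro x hx q hq
        obtain ⟨hx1, hx2⟩ := (c2 x).1 hx
        have hxv : val8P g H W x := hv x (List.mem_cons_of_mem _ hx1)
        have hq1 : q ∈ h :: t := hcl x (List.mem_cons_of_mem _ hx1) q hq
        have hq2 : ¬ Relation.ReflTransGen (adjP g H W) h q := by
          intro hcon
          exact hx2 (Relation.ReflTransGen.tail hcon (adjP_symm g H W x q hxv hq))
        rcases List.mem_cons.1 hq1 with h1 | h1
        · subst h1
          exact absurd Relation.ReflTransGen.refl hq2
        · exact (c2 q).2 ⟨h1, hq2⟩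
      -- new marks characterisation
      have hm' : ∀ x, x ∈ (cornerList (closeComp (t.length + 1) [h] t).1).foldl
          (fun m p => if (closeComp (t.length + 1) [h] t).1.contains p then m
            else PySem.Set.add m p) marks ↔
            ∃ q, val8P g H W q ∧ q ∉ (closeComp (t.length + 1) [h] t).2 ∧
              x ∈ cornerList (componentB g H W q) ∧
                ¬ Relation.ReflTransGen (adjP g H W) q x := by
        intro x
        rw [listMarkFold ((closeComp (t.length + 1) [h] t).1)
            (cornerList (closeComp (t.length + 1) [h] t).1) marks x, hm x, hclcomp]
        constructor
        · rintro (⟨q, hq1, hq2, hq3, hq4⟩ | ⟨h1, h2⟩)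
          · refine ⟨q, hq1, ?_, hq3, hq4⟩
            intro hcon
            exact hq2 (List.mem_cons_of_mem _ ((c2 q).1 hcon).1)
          · refine ⟨h, hhv, ?_, h1, ?_⟩
            · intro hcon
              exact ((c2 h).1 hcon).2 Relation.ReflTransGen.refl
            · intro hcon
              exact h2 ((c1 x).2 hcon)
        · rintro ⟨q, hq1, hq2, hq3, hq4⟩
          by_cases hqh : Relation.ReflTransGen (adjP g H W) h q
          · refine Or.inr ⟨?_, ?_⟩
            · rwa [corner_transfer g H W h q hhv hqh] at hq3
            · intro hcon
              exact hq4 ((class_eq g H W h q hhv hqh x).2 ((c1 x).1 hcon))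
          · refine Or.inl ⟨q, hq1, ?_, hq3, hq4⟩
            intro hcon
            rcases List.mem_cons.1 hcon with h1 | h1
            · subst h1
              exact hqh Relation.ReflTransGen.refl
            · exact hq2 ((c2 q).2 ⟨h1, fun hc2 => hqh hc2⟩)
      exact ih (closeComp (t.length + 1) [h] t).2 _ hrlen hrnd hrv hrcl hm' p

lemma alt_marks (g : List (List Int)) :
    ∀ p, p ∈ partLoop (cellsB g).length (cellsB g) PySem.Set.empty ↔
      MarkChar g (g.length : Int) ((g.headD []).length : Int) p := by
  refine partLoop_spec g (g.length : Int) ((g.headD []).length : Int)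
    (cellsB g).length (cellsB g) PySem.Set.empty (Nat.le_refl _) (cellsB_nodup g)
    (fun p hp => (cellsB_mem g p).1 hp) ?_ ?_
  · intro p _ q hq
    exact (cellsB_mem g q).2 hq.2
  · intro p
    constructor
    · intro hp
      exact absurd hp (List.not_mem_nil)
    · rintro ⟨q, hq1, hq2, _⟩
      exact absurd ((cellsB_mem g q).2 hq1) hq2

-- ===== VERDICT (by name: the statement is the Claim_ definition above) =====
theorem solve_3aa6fb7a_spec : Claim_equal_solve_3aa6fb7a := by
  intro g _ hPre
  unfold Spec_solve_3aa6fb7a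
  rw [A_eq_model g hPre]
  unfold modelRun solve_3aa6fb7a_alt
  dsimp only
  have hc : ∀ p : Int × Int, PySem.Set.contains (modelScan g).2 p =
      PySem.Set.contains (partLoop (cellsB g).length (cellsB g) PySem.Set.empty) p := by
    intro p
    rw [Bool.eq_iff_iff, PySem.Set.contains_iff, PySem.Set.contains_iff,
        modelScan_marks g p, alt_marks g p]
  simp only [hc]
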